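-- pv_equiv track=rewrite | github.com/HBinhCT/Q-project | hackerrank/Algorithms/Problem solving/solution.py | problemSolving
-- ===== SOURCE A (Python) =====
-- def problemSolving(k, v):
--     #
--     # Write your code here.
--     #
--     from collections import defaultdict
--
--     size = len(v)
--     f = [-1] * size
--     b = [-1] * size
--     d = defaultdict(list)
--     for i in range(size):
--         for j in range(i + 1, size):
--             if abs(v[j] - v[i]) >= k:
--                 d[i].append(j)
--
--     def solve(x, s):
--         for i in d[x]:
--             if f[i] != s:
--                 f[i] = s
--                 if b[i] == -1 or solve(b[i], s):
--                     b[i] = x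
--                     return 1
--         return 0
--
--     count = 0
--     for i in range(size):
--         count += solve(i, i)
--     return size - count
-- ===== SOURCE B (Python) =====
-- def problemSolving(k, v):
--     n = len(v)
--     ml = [-1] * n
--     mr = [-1] * n
--     matched = 0
--     while True:
--         par = [-1] * n
--         seen = [ml[i] == -1 for i in range(n)]
--         goal = -1
--         changed = True
--         while changed and goal == -1:
--             changed = False
--             for x in range(n):
--                 if goal != -1:
--                     break
--                 if seen[x]:
--                     for j in range(x + 1, n):
--                         if par[j] == -1 and j != ml[x] and abs(v[j] - v[x]) >= k:
--                             par[j] = x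
--                             changed = True
--                             y = mr[j]
--                             if y == -1:
--                                 goal = j
--                                 break
--                             if not seen[y]:
--                                 seen[y] = True
--         if goal == -1:
--             break
--         j = goal
--         while j != -1:
--             x = par[j]
--             nxt = ml[x]
--             ml[x] = j
--             mr[j] = x
--             j = nxt
--         matched += 1
--     return n - matched
-- ===== Notes on version B (the rewrite author's own statement) =====
-- stated objective: alternative
-- what changed: B replaces A's per-vertex recursive DFS (Kuhn) augmenting search with a phase-based matcher: each phase propagates alternating-reachability labels from all free left vertices by repeated array passes (no recursion, no adjacency dict, no stamp array), stopping as soon as a free right vertex is reached, and augments by flipping the parent-pointer chain of that vertex; both compute a maximum matching, whose size is unique, so n - matched is identical.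
import Mathlib
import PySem

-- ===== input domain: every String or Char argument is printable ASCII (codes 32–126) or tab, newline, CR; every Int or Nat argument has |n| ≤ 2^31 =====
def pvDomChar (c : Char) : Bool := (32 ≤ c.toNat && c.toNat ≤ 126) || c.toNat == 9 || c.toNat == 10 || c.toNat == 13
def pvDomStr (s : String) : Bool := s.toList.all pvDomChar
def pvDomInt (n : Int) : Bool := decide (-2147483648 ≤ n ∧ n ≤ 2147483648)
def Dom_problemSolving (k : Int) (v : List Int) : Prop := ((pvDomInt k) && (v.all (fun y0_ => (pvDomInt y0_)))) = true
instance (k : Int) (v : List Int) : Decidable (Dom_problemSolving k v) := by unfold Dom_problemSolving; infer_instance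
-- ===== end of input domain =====

-- B replaces A's per-vertex recursive DFS (Kuhn) augmenting search by a phase-based
-- matcher: label-propagation passes from all free left vertices (stopping as soon as a
-- free right vertex is reached, or at a fixpoint), then an augmentation flipping a
-- parent-pointer chain; both results are maximum matchings of the same graph, whose
-- size is unique, so the returned values agree (objective: alternative).

-- ===== PORT A =====
-- every list index used by the ports is a nonnegative in-range index (range-produced)


def pvGet (l : List Int) (i : Int) : Int := PySem.List.pyGetD l i 0

-- ===== abstract bipartite-matching theory =====

def pvSet (l : List Int) (i : Int) (x : Int) : List Int := l.set i.toNat x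

def pvBuildD (k : Int) (v : List Int) : PySem.Dict Int (List Int) :=
  (PySem.List.pyRange 0 (v.length : Int) 1).foldl (fun d i =>
    (PySem.List.pyRange (i + 1) (v.length : Int) 1).foldl (fun d j =>
      if k ≤ |pvGet v j - pvGet v i| then d.insert i (d.getD i [] ++ [j]) else d) d)
    PySem.Dict.empty

def pvSolveA (fuel : Nat) (d : PySem.Dict Int (List Int)) (ns : List Int)
    (x s : Int) (f b : List Int) : Int × List Int × List Int :=
  match ns with
  | [] => (0, f, b)
  | i :: rest =>
    if pvGet f i = s then pvSolveA fuel d rest x s f b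
    else
      let f' := pvSet f i s
      if pvGet b i = -1 then (1, f', pvSet b i x)
      else
        match fuel with
        | 0 => (0, f', b)
        | fuel' + 1 =>
          match pvSolveA fuel' d (d.getD (pvGet b i) []) (pvGet b i) s f' b with
          | (r, f2, b2) =>
            if r = 1 then (1, f2, pvSet b2 i x)
            else pvSolveA (fuel' + 1) d rest x s f2 b2
  termination_by (fuel, ns.length)
  decreasing_by
  · exact Prod.Lex.right _ (by simp)
  · exact Prod.Lex.left _ _ (by omega)
  · exact Prod.Lex.right _ (by simp)

def problemSolving (k : Int) (v : List Int) : Int :=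
  let size : Int := (v.length : Int)
  let d := pvBuildD k v
  let res := (PySem.List.pyRange 0 size 1).foldl
    (fun st i =>
      match st with
      | (c, f, b) =>
        match pvSolveA v.length d (d.getD i []) i i f b with
        | (r, f', b') => (c + r, f', b'))
    ((0 : Int), List.replicate v.length (-1 : Int), List.replicate v.length (-1 : Int))
  size - res.1

-- ===== PORT B =====

def pvGetB (l : List Bool) (i : Int) : Bool := PySem.List.pyGetD l i false

def pvSetB (l : List Bool) (i : Int) (x : Bool) : List Bool := l.set i.toNat x

-- the inner `for j in range(x+1, n)` loop; a set goal models the `break`s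

def pvScan (k : Int) (v ml mr : List Int) (x : Int)
    (st : List Int × List Bool × Bool × Int) : List Int × List Bool × Bool × Int :=
  (PySem.List.pyRange (x + 1) (v.length : Int) 1).foldl
    (fun st j =>
      match st with
      | (par, seen, ch, g) =>
        if g ≠ -1 then (par, seen, ch, g)
        else if pvGet par j = -1 ∧ j ≠ pvGet ml x ∧ k ≤ |pvGet v j - pvGet v x| then
          let par' := pvSet par j x
          if pvGet mr j = -1 then (par', seen, true, j)
          else
            let y := pvGet mr j
            let seen' := if ¬ pvGetB seen y = true then pvSetB seen y true else seen
            (par', seen', true, g)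
        else (par, seen, ch, g)) st

-- one pass `for x in range(n)` with changed reset to False (goal = -1 on entry)

def pvPass (k : Int) (v ml mr : List Int) (par : List Int) (seen : List Bool) :
    List Int × List Bool × Bool × Int :=
  (PySem.List.pyRange 0 (v.length : Int) 1).foldl
    (fun st x =>
      match st with
      | (par, seen, ch, g) =>
        if g ≠ -1 then (par, seen, ch, g)
        else if pvGetB seen x = true then pvScan k v ml mr x (par, seen, ch, g)
        else (par, seen, ch, g)) (par, seen, false, -1)

-- `while changed and goal == -1:` — fuel bounds the number of passes

def pvFix (k : Int) (v ml mr : List Int) : Nat → List Int → List Bool → List Int × List Bool × Int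
  | 0, par, seen => (par, seen, -1)
  | fuel + 1, par, seen =>
    match pvPass k v ml mr par seen with
    | (par', seen', ch, g) =>
      if ch = true ∧ g = -1 then pvFix k v ml mr fuel par' seen' else (par', seen', g)

-- `while j != -1:` — flip the parent-pointer chain (chain length < fuel)

def pvFlip (par : List Int) : Nat → List Int → List Int → Int → List Int × List Int
  | fuel, ml, mr, j =>
    if j = -1 then (ml, mr)
    else
      match fuel with
      | 0 => (ml, mr)
      | fuel' + 1 =>
        let x := pvGet par j
        let nxt := pvGet ml x
        pvFlip par fuel' (pvSet ml x j) (pvSet mr j x) nxt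

-- the outer `while True:` phase loop; fuel bounds the number of phases

def pvPhases (k : Int) (v : List Int) : Nat → List Int → List Int → Int → Int
  | 0, _, _, matched => (v.length : Int) - matched
  | fuel + 1, ml, mr, matched =>
    let n := v.length
    let par0 := List.replicate n (-1 : Int)
    let seen0 := (PySem.List.pyRange 0 (n : Int) 1).map (fun i => decide (pvGet ml i = -1))
    match pvFix k v ml mr (n + 2) par0 seen0 with
    | (par, seen, g) =>
      if g = -1 then (n : Int) - matched
      else
        match pvFlip par (n + 1) ml mr g with
        | (ml', mr') => pvPhases k v fuel ml' mr' (matched + 1)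

def problemSolving_alt (k : Int) (v : List Int) : Int :=
  pvPhases k v (v.length + 1) (List.replicate v.length (-1 : Int))
    (List.replicate v.length (-1 : Int)) 0

-- alternating parent-pointer chains

-- ===== PRECONDITION & SPEC =====
def Spec_problemSolving (k : Int) (v : List Int) (out : Int) : Prop := out = problemSolving_alt k v
instance (k : Int) (v : List Int) (out : Int) : Decidable (Spec_problemSolving k v out) := by unfold Spec_problemSolving; infer_instance

-- ===== CLAIM (what is proved, stated in full; the proofs are below) =====
def Claim_equal_problemSolving : Prop := ∀ (k : Int) (v : List Int), Dom_problemSolving k v → Spec_problemSolving k v (problemSolving k v)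

-- ===== LEMMAS AND PROOFS =====
-- abstract bipartite-matching theory (edges, matchings, alternating reachability,
-- path flipping, a König-style maximality argument), then the analysis of A's
-- recursive Kuhn search and of B's label-propagation phases

def InRg (v : List Int) (j : Int) : Prop := 0 ≤ j ∧ j < (v.length : Int)

def EdgeKV (k : Int) (v : List Int) (l r : Int) : Prop :=
  0 ≤ l ∧ l < r ∧ r < (v.length : Int) ∧ k ≤ |pvGet v r - pvGet v l|

def IsM (k : Int) (v : List Int) (M : Int → Option Int) : Prop :=
  (∀ j l, M j = some l → EdgeKV k v l j) ∧
  (∀ j j' l, M j = some l → M j' = some l → j = j')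

def msize (v : List Int) (M : Int → Option Int) : Nat :=
  ((Finset.range v.length).filter (fun j : Nat => (M (j : Int)).isSome)).card

def lMt (M : Int → Option Int) (l : Int) : Prop := ∃ j, M j = some l

inductive ReachKV (k : Int) (v : List Int) (M : Int → Option Int) (u : Int) : Int → Prop
  | base : ∀ r, EdgeKV k v u r → ReachKV k v M u r
  | step : ∀ r x r', ReachKV k v M u r → M r = some x → EdgeKV k v x r' → ReachKV k v M u r'

-- reachability with the explicit list of previously visited right vertices (latest first)

inductive ReachP (k : Int) (v : List Int) (M : Int → Option Int) (u : Int) : List Int → Int → Prop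
  | base : ∀ r, EdgeKV k v u r → ReachP k v M u [] r
  | step : ∀ L r x r', ReachP k v M u L r → M r = some x → EdgeKV k v x r' →
      ReachP k v M u (r :: L) r'

def NoAugFrom (k : Int) (v : List Int) (M : Int → Option Int) (u : Int) : Prop :=
  ∀ r, ReachKV k v M u r → M r ≠ none

def BddM (M : Int → Option Int) (t : Int) : Prop := ∀ j l, M j = some l → l < t

def MaxUpTo (k : Int) (v : List Int) (M : Int → Option Int) (t : Int) : Prop :=
  ∀ N, IsM k v N → BddM N t → msize v N ≤ msize v M

def updM (M : Int → Option Int) (r : Int) (w : Option Int) : Int → Option Int :=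
  fun j => if j = r then w else M j

theorem edge_rangeL {k : Int} {v : List Int} {l r : Int} (h : EdgeKV k v l r) : InRg v l :=
  ⟨h.1, lt_trans h.2.1 h.2.2.1⟩

theorem edge_rangeR {k : Int} {v : List Int} {l r : Int} (h : EdgeKV k v l r) : InRg v r :=
  ⟨le_of_lt (lt_of_le_of_lt h.1 h.2.1), h.2.2.1⟩

theorem reachKV_to_reachP {k : Int} {v : List Int} {M : Int → Option Int} {u r : Int}
    (h : ReachKV k v M u r) : ∃ L, ReachP k v M u L r := by
  induction h with
  | base r hre => exact ⟨[], ReachP.base r hre⟩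
  | step r x r' _ hmr hre ih =>
    obtain ⟨L, hL⟩ := ih
    exact ⟨r :: L, ReachP.step L r x r' hL hmr hre⟩

theorem reachP_suffix {k : Int} {v : List Int} {M : Int → Option Int} {u : Int} :
    ∀ {L : List Int} {r : Int}, ReachP k v M u L r →
      ∀ {L₁ r'' L₂}, L = L₁ ++ r'' :: L₂ → ReachP k v M u L₂ r'' := by
  intro L r h
  induction h with
  | base r hre =>
    intro L₁ r'' L₂ heq
    exact absurd heq (by simp)
  | step L r x r' hL hmr hre ih =>
    intro L₁ r'' L₂ heq
    cases L₁ with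
    | nil =>
      simp only [List.nil_append, List.cons.injEq] at heq
      obtain ⟨h1, h2⟩ := heq
      subst h1 h2
      exact hL
    | cons a L₁' =>
      simp only [List.cons_append, List.cons.injEq] at heq
      exact ih heq.2

theorem reachP_dedup {k : Int} {v : List Int} {M : Int → Option Int} {u : Int} :
    ∀ (n : Nat) (L : List Int) (r : Int), L.length ≤ n → ReachP k v M u L r →
      ∃ L', ReachP k v M u L' r ∧ (r :: L').Nodup := by
  intro n
  induction n with
  | zero =>
    intro L r hlen h
    cases h with
    | base _r hre => exact ⟨[], ReachP.base r hre, by simp⟩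
    | step L₀ r₀ x r'' hL hmr hre => simp at hlen
  | succ n ih =>
    intro L r hlen h
    cases h with
    | base _r hre => exact ⟨[], ReachP.base r hre, by simp⟩
    | step L₀ r₀ x r'' hL hmr hre =>
      -- h : ReachP (r₀ :: L₀) r  via  hL : ReachP L₀ r₀
      obtain ⟨L₁, hL₁, hnd₁⟩ := ih L₀ r₀ (by simp at hlen; omega) hL
      have hstep : ReachP k v M u (r₀ :: L₁) r := ReachP.step L₁ r₀ x r hL₁ hmr hre
      by_cases hr : r ∈ r₀ :: L₁
      · -- extract the suffix derivation at r; it sits inside a Nodup list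
        obtain ⟨L₂, L₃, heq⟩ := List.append_of_mem hr
        have hsuf := reachP_suffix hstep (L₁ := L₂) (r'' := r) (L₂ := L₃) heq
        refine ⟨L₃, hsuf, ?_⟩
        have : (r₀ :: L₁).Sublist (r₀ :: L₁) := List.Sublist.refl _
        have hnd : (r :: L₃).Nodup := by
          have h2 : (r :: L₃).Sublist (r₀ :: L₁) := by
            rw [heq]
            exact (List.sublist_append_right L₂ (r :: L₃))
          exact h2.nodup hnd₁
        exact hnd
      · exact ⟨r₀ :: L₁, hstep, List.nodup_cons.mpr ⟨hr, hnd₁⟩⟩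

-- flip along a duplicate-free alternating path (strengthened for the induction)

theorem flipP {k : Int} {v : List Int} {M : Int → Option Int} {u : Int}
    (hM : IsM k v M) (hu : ¬ lMt M u) :
    ∀ {L : List Int} {r : Int}, ReachP k v M u L r → (r :: L).Nodup →
      ∃ M', IsM k v M' ∧ (M' r).isSome ∧ (∀ j, j ≠ r → (M' j).isSome = (M j).isSome) ∧
        (∀ j, j ∉ r :: L → M' j = M j) ∧
        (∀ l, lMt M' l ↔ ((lMt M l ∨ l = u) ∧ M r ≠ some l)) := by
  intro L r h
  induction h with
  | base r hre =>
    intro _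
    refine ⟨updM M r (some u), ⟨?_, ?_⟩, by simp [updM], ?_, ?_, ?_⟩
    · intro j l hj
      by_cases hjr : j = r
      · subst hjr; simp only [updM, if_pos rfl] at hj; cases hj; exact hre
      · simp only [updM, if_neg hjr] at hj; exact hM.1 j l hj
    · intro j j' l hj hj'
      by_cases hjr : j = r <;> by_cases hj'r : j' = r
      · subst hjr; subst hj'r; rfl
      · subst hjr; simp only [updM, if_pos rfl] at hj; cases hj
        simp only [updM, if_neg hj'r] at hj'
        exact absurd ⟨j', hj'⟩ hu
      · subst hj'r; simp only [updM, if_pos rfl] at hj'; cases hj'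
        simp only [updM, if_neg hjr] at hj
        exact absurd ⟨j, hj⟩ hu
      · simp only [updM, if_neg hjr] at hj; simp only [updM, if_neg hj'r] at hj'
        exact hM.2 j j' l hj hj'
    · intro j hjr; simp [updM, if_neg hjr]
    · intro j hj
      simp only [List.mem_singleton] at hj
      simp [updM, if_neg hj]
    · intro l
      constructor
      · rintro ⟨j, hj⟩
        by_cases hjr : j = r
        · subst hjr; simp only [updM, if_pos rfl] at hj; cases hj
          exact ⟨Or.inr rfl, fun hc => hu ⟨_, hc⟩⟩
        · simp only [updM, if_neg hjr] at hj
          exact ⟨Or.inl ⟨j, hj⟩, fun hc => hjr (hM.2 j r l hj hc)⟩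
      · rintro ⟨hl | hl, hne⟩
        · obtain ⟨j, hj⟩ := hl
          by_cases hjr : j = r
          · subst hjr; exact absurd hj hne
          · exact ⟨j, by simp [updM, if_neg hjr, hj]⟩
        · subst hl; exact ⟨r, by simp [updM]⟩
  | step L r x r' hL hmr hre ih =>
    intro hnd
    have hnd' : (r :: L).Nodup := (List.nodup_cons.mp hnd).2
    have hr'r : r' ≠ r := by
      have := (List.nodup_cons.mp hnd).1
      simp only [List.mem_cons] at this
      exact fun hc => this (Or.inl hc)
    have hr'L : r' ∉ r :: L := (List.nodup_cons.mp hnd).1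
    obtain ⟨M₁, hM₁, hsome₁, hoff₁, hval₁, hlm₁⟩ := ih hnd'
    have hMr' : M₁ r' = M r' := hval₁ r' hr'L
    have hxM1 : ¬ lMt M₁ x := by
      rw [hlm₁ x]
      rintro ⟨-, hne⟩; exact hne hmr
    refine ⟨updM M₁ r' (some x), ⟨?_, ?_⟩, by simp [updM], ?_, ?_, ?_⟩
    · intro j l hj
      by_cases hjr : j = r'
      · subst hjr; simp only [updM, if_pos rfl] at hj; cases hj; exact hre
      · simp only [updM, if_neg hjr] at hj; exact hM₁.1 j l hj
    · intro j j' l hj hj'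
      by_cases hjr : j = r' <;> by_cases hj'r : j' = r'
      · subst hjr; subst hj'r; rfl
      · subst hjr; simp only [updM, if_pos rfl] at hj; cases hj
        simp only [updM, if_neg hj'r] at hj'
        exact absurd ⟨j', hj'⟩ hxM1
      · subst hj'r; simp only [updM, if_pos rfl] at hj'; cases hj'
        simp only [updM, if_neg hjr] at hj
        exact absurd ⟨j, hj⟩ hxM1
      · simp only [updM, if_neg hjr] at hj; simp only [updM, if_neg hj'r] at hj'
        exact hM₁.2 j j' l hj hj'
    · intro j hjr
      simp only [updM, if_neg hjr]
      by_cases hjr2 : j = r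
      · subst hjr2
        rw [Option.isSome_iff_exists.mpr ⟨_, (Option.isSome_iff_exists.mp hsome₁).choose_spec⟩,
            Option.isSome_iff_exists.mpr ⟨x, hmr⟩]
      · exact hoff₁ j hjr2
    · intro j hj
      simp only [List.mem_cons, not_or] at hj
      obtain ⟨hj1, hj2, hj3⟩ := hj
      rw [updM, if_neg hj1]
      exact hval₁ j (by simp only [List.mem_cons, not_or]; exact ⟨hj2, hj3⟩)
    · intro l
      by_cases hlx : l = x
      · subst hlx
        constructor
        · intro _
          refine ⟨Or.inl ⟨r, hmr⟩, fun hc => hr'r (hM.2 r' r _ hc hmr)⟩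
        · intro _
          exact ⟨r', by simp [updM]⟩
      · constructor
        · rintro ⟨j, hj⟩
          by_cases hjr : j = r'
          · subst hjr; simp only [updM, if_pos rfl] at hj; cases hj; exact absurd rfl hlx
          · simp only [updM, if_neg hjr] at hj
            have h1 := (hlm₁ l).mp ⟨j, hj⟩
            refine ⟨h1.1, ?_⟩
            intro hc
            have : M₁ r' = some l := by rw [hMr']; exact hc
            exact hjr (hM₁.2 j r' l hj this)
        · rintro ⟨hl, hne⟩
          have h1 : lMt M₁ l := by
            rw [hlm₁ l]
            refine ⟨hl, ?_⟩
            intro hc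
            rw [hmr] at hc
            cases hc
            exact hlx rfl
          obtain ⟨j, hj⟩ := h1
          have hjr : j ≠ r' := by
            intro hc; subst hc
            rw [hMr'] at hj
            exact hne hj
          exact ⟨j, by simp [updM, if_neg hjr, hj]⟩

-- flipping an augmenting path: a strictly bigger matching with one more left, u

theorem flip_aug {k : Int} {v : List Int} {M : Int → Option Int} {u r : Int}
    (hM : IsM k v M) (hu : ¬ lMt M u) (hr : ReachKV k v M u r) (hfree : M r = none) :
    ∃ M', IsM k v M' ∧ msize v M' = msize v M + 1 ∧
      (∀ l, lMt M' l → (lMt M l ∨ l = u)) := by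
  obtain ⟨L, hL⟩ := reachKV_to_reachP hr
  obtain ⟨L', hL', hnd⟩ := reachP_dedup L.length L r le_rfl hL
  obtain ⟨M', hM', hsome, hoff, _, hlm⟩ := flipP hM hu hL' hnd
  have hrrg : InRg v r := by
    cases hL' with
    | base _r hre => exact edge_rangeR hre
    | step L r0 x r1 hL0 hmr hre => exact edge_rangeR hre
  refine ⟨M', hM', ?_, fun l hl => ((hlm l).mp hl).1⟩
  unfold msize
  obtain ⟨hrg1, hrg2⟩ := hrrg
  have hrn : r.toNat < v.length := by omega
  have hrt : ((r.toNat : Int)) = r := by omega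
  have hset : (Finset.range v.length).filter (fun j : Nat => (M' (j : Int)).isSome) =
      insert r.toNat ((Finset.range v.length).filter (fun j : Nat => (M (j : Int)).isSome)) := by
    ext j
    simp only [Finset.mem_filter, Finset.mem_insert, Finset.mem_range]
    constructor
    · rintro ⟨hj1, hj2⟩
      by_cases hjr : (j : Int) = r
      · left; omega
      · right
        exact ⟨hj1, by rw [← hoff (j : Int) hjr]; exact hj2⟩
    · rintro (hj | ⟨hj1, hj2⟩)
      · subst hj
        exact ⟨hrn, by rw [hrt]; exact hsome⟩
      · by_cases hjr : (j : Int) = r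
        · exact ⟨hj1, by rw [hjr]; exact hsome⟩
        · exact ⟨hj1, by rw [hoff (j : Int) hjr]; exact hj2⟩
  rw [hset, Finset.card_insert_of_notMem]
  simp only [Finset.mem_filter, Finset.mem_range, not_and]
  intro _
  rw [hrt, hfree]
  simp

-- König-style maximality: a matching without augmenting paths (from free lefts < t)
-- is at least as large as any matching whose lefts lie below t

theorem koenig (k : Int) (v : List Int) (M N : Int → Option Int) (t : Int)
    (hM : IsM k v M) (hN : IsM k v N) (hNb : BddM N t)
    (hno : ∀ u, 0 ≤ u → u < t → ¬ lMt M u → NoAugFrom k v M u) :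
    msize v N ≤ msize v M := by
  classical
  set ZR : Int → Prop := fun r => ∃ u, 0 ≤ u ∧ u < t ∧ ¬ lMt M u ∧ ReachKV k v M u r with hZR
  have hZRsome : ∀ r, ZR r → (M r).isSome := by
    rintro r ⟨u, hu0, hut, huf, hrch⟩
    have := hno u hu0 hut huf r hrch
    cases hMr : M r with
    | none => exact absurd hMr this
    | some l => rfl
  have hZRstep : ∀ r l r', ZR r → M r = some l → EdgeKV k v l r' → ZR r' := by
    rintro r l r' ⟨u, hu0, hut, huf, hrch⟩ hMr hre
    exact ⟨u, hu0, hut, huf, ReachKV.step r l r' hrch hMr hre⟩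
  set F : ℕ → ℕ := fun j : ℕ => if ZR (j : Int) then j
      else if h : ∃ j' : ℕ, j' < v.length ∧ M (j' : Int) = N (j : Int) then Classical.choose h
      else 0 with hF
  have hchoose : ∀ (j : ℕ), ¬ ZR (j : Int) → (N (j : Int)).isSome →
      ∃ c : ℕ, F j = c ∧ c < v.length ∧ M (c : Int) = N (j : Int) := by
    intro j hz hjs
    obtain ⟨l, hl⟩ := Option.isSome_iff_exists.mp hjs
    have hedge := hN.1 _ _ hl
    have hlt := hNb _ _ hl
    have hlm : lMt M l := by
      by_contra hlf
      exact hz ⟨l, hedge.1, hlt, hlf, ReachKV.base _ hedge⟩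
    obtain ⟨jr, hjr⟩ := hlm
    have hjrr := edge_rangeR (hM.1 _ _ hjr)
    obtain ⟨hj1, hj2⟩ := hjrr
    have hex : ∃ j' : ℕ, j' < v.length ∧ M (j' : Int) = N (j : Int) := by
      refine ⟨jr.toNat, by omega, ?_⟩
      have h3 : ((jr.toNat : Int)) = jr := by omega
      rw [h3, hjr, hl]
    refine ⟨Classical.choose hex, ?_, Classical.choose_spec hex⟩
    rw [hF]
    simp only [if_neg hz, dif_pos hex]
  refine Finset.card_le_card_of_injOn F ?_ ?_
  · intro j hj
    obtain ⟨hjn', hjs⟩ := Finset.mem_filter.mp hj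
    have hjn : j < v.length := Finset.mem_range.mp hjn'
    by_cases hz : ZR (j : Int)
    · have : F j = j := by rw [hF]; simp only [if_pos hz]
      rw [this]
      exact Finset.mem_filter.mpr ⟨Finset.mem_range.mpr hjn, hZRsome _ hz⟩
    · obtain ⟨c, hceq, hcn, hcM⟩ := hchoose j hz hjs
      rw [hceq]
      refine Finset.mem_filter.mpr ⟨Finset.mem_range.mpr hcn, ?_⟩
      rw [hcM]
      exact hjs
  · intro j₁ hj₁ j₂ hj₂ heq
    simp only [Finset.coe_filter, Set.mem_setOf_eq, Finset.mem_range] at hj₁ hj₂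
    obtain ⟨hn₁, hs₁⟩ := hj₁
    obtain ⟨hn₂, hs₂⟩ := hj₂
    obtain ⟨l₁, hl₁⟩ := Option.isSome_iff_exists.mp hs₁
    obtain ⟨l₂, hl₂⟩ := Option.isSome_iff_exists.mp hs₂
    by_cases hz₁ : ZR (j₁ : Int) <;> by_cases hz₂ : ZR (j₂ : Int)
    · have e1 : F j₁ = j₁ := by rw [hF]; simp only [if_pos hz₁]
      have e2 : F j₂ = j₂ := by rw [hF]; simp only [if_pos hz₂]
      rw [e1, e2] at heq; exact heq
    · have e1 : F j₁ = j₁ := by rw [hF]; simp only [if_pos hz₁]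
      obtain ⟨c₂, hceq, hcn, hcM⟩ := hchoose j₂ hz₂ hs₂
      rw [e1, hceq] at heq
      subst heq
      rw [hl₂] at hcM
      have := hZRstep _ _ _ hz₁ hcM (hN.1 _ _ hl₂)
      exact absurd this hz₂
    · have e2 : F j₂ = j₂ := by rw [hF]; simp only [if_pos hz₂]
      obtain ⟨c₁, hceq, hcn, hcM⟩ := hchoose j₁ hz₁ hs₁
      rw [e2, hceq] at heq
      have heq' := heq.symm
      subst heq'
      rw [hl₁] at hcM
      have := hZRstep _ _ _ hz₂ hcM (hN.1 _ _ hl₁)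
      exact absurd this hz₁
    · obtain ⟨c₁, hceq₁, hcn₁, hcM₁⟩ := hchoose j₁ hz₁ hs₁
      obtain ⟨c₂, hceq₂, hcn₂, hcM₂⟩ := hchoose j₂ hz₂ hs₂
      rw [hceq₁, hceq₂] at heq
      subst heq
      rw [hcM₁, hl₁, hl₂] at hcM₂
      have hll : l₁ = l₂ := by
        have := Option.some.inj hcM₂
        exact this
      subst hll
      have hji : (j₁ : Int) = (j₂ : Int) := hN.2 _ _ _ hl₁ hl₂
      omega

-- successful augmentation step: one more matched pair extends maximality to the next left

theorem max_succ (k : Int) (v : List Int) (M M' : Int → Option Int) (t : Int)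
    (hmax : MaxUpTo k v M t) (hsz : msize v M' = msize v M + 1) :
    MaxUpTo k v M' (t + 1) := by
  classical
  intro N hN hNb
  set N' : Int → Option Int := fun j => if N j = some t then none else N j with hN'
  have hN'M : IsM k v N' := by
    constructor
    · intro j l hj
      simp only [hN'] at hj
      by_cases hc : N j = some t
      · rw [if_pos hc] at hj; cases hj
      · rw [if_neg hc] at hj; exact hN.1 j l hj
    · intro j j' l hj hj'
      simp only [hN'] at hj hj'
      by_cases hc : N j = some t
      · rw [if_pos hc] at hj; cases hj
      · by_cases hc' : N j' = some t
        · rw [if_pos hc'] at hj'; cases hj'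
        · rw [if_neg hc] at hj; rw [if_neg hc'] at hj'
          exact hN.2 j j' l hj hj'
  have hN'b : BddM N' t := by
    intro j l hj
    simp only [hN'] at hj
    by_cases hc : N j = some t
    · rw [if_pos hc] at hj; cases hj
    · rw [if_neg hc] at hj
      have := hNb j l hj
      have hlt : l ≠ t := fun h => hc (h ▸ hj)
      omega
  have hstep : msize v N ≤ msize v N' + 1 := by
    unfold msize
    by_cases hex : ∃ j₀ : ℕ, N (j₀ : Int) = some t
    · obtain ⟨j₀, hj₀⟩ := hex
      have hsub : (Finset.range v.length).filter (fun j : Nat => (N (j : Int)).isSome) ⊆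
          insert j₀ ((Finset.range v.length).filter (fun j : Nat => (N' (j : Int)).isSome)) := by
        intro j hj
        obtain ⟨hj1, hj2⟩ := Finset.mem_filter.mp hj
        by_cases hc : N (j : Int) = some t
        · have : (j : Int) = (j₀ : Int) := hN.2 _ _ _ hc hj₀
          have : j = j₀ := by omega
          exact Finset.mem_insert.mpr (Or.inl this)
        · refine Finset.mem_insert.mpr (Or.inr (Finset.mem_filter.mpr ⟨hj1, ?_⟩))
          simp only [hN']
          simp only [if_neg hc]
          exact hj2
      calc ((Finset.range v.length).filter (fun j : Nat => (N (j : Int)).isSome)).card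
          ≤ (insert j₀ ((Finset.range v.length).filter (fun j : Nat => (N' (j : Int)).isSome))).card :=
            Finset.card_le_card hsub
        _ ≤ ((Finset.range v.length).filter (fun j : Nat => (N' (j : Int)).isSome)).card + 1 :=
            Finset.card_insert_le _ _
    · have hsub : (Finset.range v.length).filter (fun j : Nat => (N (j : Int)).isSome) ⊆
          (Finset.range v.length).filter (fun j : Nat => (N' (j : Int)).isSome) := by
        intro j hj
        obtain ⟨hj1, hj2⟩ := Finset.mem_filter.mp hj
        refine Finset.mem_filter.mpr ⟨hj1, ?_⟩
        simp only [hN']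
        have hc : ¬ N (j : Int) = some t := fun h => hex ⟨j, h⟩
        simp only [if_neg hc]
        exact hj2
      exact le_trans (Finset.card_le_card hsub) (Nat.le_succ _)
  calc msize v N ≤ msize v N' + 1 := hstep
    _ ≤ msize v M + 1 := by have := hmax N' hN'M hN'b; omega
    _ = msize v M' := hsz.symm

-- failed phase: no augmenting path from the current root extends maximality

theorem max_fail (k : Int) (v : List Int) (M : Int → Option Int) (t : Int)
    (hM : IsM k v M) (hMb : BddM M t) (hmax : MaxUpTo k v M t)
    (hnot : NoAugFrom k v M t) :
    MaxUpTo k v M (t + 1) := by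
  classical
  intro N hN hNb
  refine koenig k v M N (t + 1) hM hN hNb ?_
  intro u hu0 hut huf
  by_cases hutt : u = t
  · subst hutt; exact hnot
  · have hult : u < t := by omega
    intro r hrch
    intro hfree
    obtain ⟨M', hM', hsz, hlm⟩ := flip_aug hM huf hrch hfree
    have hM'b : BddM M' t := by
      intro j l hj
      rcases hlm l ⟨j, hj⟩ with h | h
      · obtain ⟨j', hj'⟩ := h
        exact hMb j' l hj'
      · omega
    have := hmax M' hM' hM'b
    omega

-- ===== A-side plumbing =====

theorem pvGet_elem (l : List Int) (i : Int) (h0 : 0 ≤ i) (h : i < (l.length : Int)) :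
    pvGet l i = l[i.toNat]'(by omega) :=
  PySem.List.pyGetD_eq_getElem l 0 h0 h

theorem length_pvSet (l : List Int) (i x : Int) : (pvSet l i x).length = l.length := by
  simp [pvSet]

theorem pvGet_pvSet (l : List Int) (i jj x : Int) (h0 : 0 ≤ i) (h : i < (l.length : Int))
    (h0' : 0 ≤ jj) (h' : jj < (l.length : Int)) :
    pvGet (pvSet l i x) jj = if jj = i then x else pvGet l jj := by
  rw [pvGet_elem _ _ h0' (by simpa [length_pvSet] using h')]
  simp only [pvSet]
  rw [List.getElem_set]
  rcases eq_or_ne jj i with rfl | hne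
  · simp
  · rw [if_neg (by omega), if_neg hne, pvGet_elem _ _ h0' h']

theorem pvGet_replicate (n : Nat) (c i : Int) (h0 : 0 ≤ i) (h : i < (n : Int)) :
    pvGet (List.replicate n c) i = c := by
  rw [pvGet_elem _ _ h0 (by simpa using h)]
  simp

def eligFrom (k : Int) (v : List Int) (x j : Int) : List Int :=
  (PySem.List.pyRange j (v.length : Int) 1).filter (fun jj => decide (k ≤ |pvGet v jj - pvGet v x|))

theorem mem_eligFrom (k : Int) (v : List Int) (x i : Int) (hx : 0 ≤ x) :
    i ∈ eligFrom k v x (x + 1) ↔ EdgeKV k v x i := by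
  unfold eligFrom EdgeKV
  rw [List.mem_filter]
  rw [PySem.List.mem_pyRange_one]
  constructor
  · rintro ⟨⟨h1, h2⟩, h3⟩
    exact ⟨hx, by omega, h2, by simpa using h3⟩
  · rintro ⟨_, h1, h2, h3⟩
    exact ⟨⟨by omega, h2⟩, by simpa using h3⟩

theorem inner_self (k : Int) (v : List Int) (i : Int) :
    ∀ (L : List Int) (d : PySem.Dict Int (List Int)),
    ((L.foldl (fun d j => if k ≤ |pvGet v j - pvGet v i| then d.insert i (d.getD i [] ++ [j]) else d) d).getD i [])
      = d.getD i [] ++ L.filter (fun j => decide (k ≤ |pvGet v j - pvGet v i|)) := by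
  intro L
  induction L with
  | nil => intro d; simp
  | cons a L ih =>
    intro d
    simp only [List.foldl_cons, List.filter_cons]
    by_cases h : k ≤ |pvGet v a - pvGet v i|
    · rw [if_pos h, ih, PySem.Dict.getD_insert_self]
      simp [h]
    · rw [if_neg h, ih]
      simp [h]

theorem inner_ne (k : Int) (v : List Int) (i x : Int) (hx : x ≠ i) :
    ∀ (L : List Int) (d : PySem.Dict Int (List Int)),
    ((L.foldl (fun d j => if k ≤ |pvGet v j - pvGet v i| then d.insert i (d.getD i [] ++ [j]) else d) d).getD x [])
      = d.getD x [] := by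
  intro L
  induction L with
  | nil => intro d; simp
  | cons a L ih =>
    intro d
    simp only [List.foldl_cons]
    by_cases h : k ≤ |pvGet v a - pvGet v i|
    · rw [if_pos h, ih, PySem.Dict.getD_insert_of_ne _ _ _ hx]
    · rw [if_neg h, ih]

theorem outer_pres (k : Int) (v : List Int) (x : Int) :
    ∀ (L : List Int), x ∉ L → ∀ (d : PySem.Dict Int (List Int)),
    ((L.foldl (fun d i =>
        (PySem.List.pyRange (i + 1) (v.length : Int) 1).foldl
          (fun d j => if k ≤ |pvGet v j - pvGet v i| then d.insert i (d.getD i [] ++ [j]) else d) d) d).getD x [])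
      = d.getD x [] := by
  intro L
  induction L with
  | nil => intro _ d; simp
  | cons a L ih =>
    intro hx d
    simp only [List.foldl_cons]
    rw [ih (fun h => hx (List.mem_cons_of_mem _ h)),
        inner_ne k v a x (fun h => hx (h ▸ List.mem_cons_self))]

theorem outer_main (k : Int) (v : List Int) :
    ∀ (L : List Int), L.Nodup → ∀ x ∈ L, ∀ (d : PySem.Dict Int (List Int)), d.getD x [] = [] →
    ((L.foldl (fun d i =>
        (PySem.List.pyRange (i + 1) (v.length : Int) 1).foldl
          (fun d j => if k ≤ |pvGet v j - pvGet v i| then d.insert i (d.getD i [] ++ [j]) else d) d) d).getD x [])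
      = eligFrom k v x (x + 1) := by
  intro L
  induction L with
  | nil => intro _ x hx; exact absurd hx (List.not_mem_nil)
  | cons a L ih =>
    intro hnd x hx d hd
    rcases List.mem_cons.mp hx with rfl | hxL
    · simp only [List.foldl_cons]
      rw [outer_pres k v x L (List.nodup_cons.mp hnd).1 _]
      rw [inner_self, hd, List.nil_append]
      rfl
    · simp only [List.foldl_cons]
      refine ih hnd.of_cons x hxL _ ?_
      rw [inner_ne k v a x ?_, hd]
      rintro rfl
      exact (List.nodup_cons.mp hnd).1 hxL

theorem buildD_getD (k : Int) (v : List Int) (x : Int) (h0 : 0 ≤ x) (h : x < (v.length : Int)) :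
    (pvBuildD k v).getD x [] = eligFrom k v x (x + 1) := by
  rw [pvBuildD]
  exact outer_main k v _ (PySem.List.nodup_pyRange_one 0 _) x
    (PySem.List.mem_pyRange_one.mpr ⟨h0, h⟩) _ (PySem.Dict.getD_empty _ _)

-- the partial map (right -> left) encoded by a back-array b

def MofA (v b : List Int) : Int → Option Int :=
  fun j => if 0 ≤ j ∧ j < (v.length : Int) ∧ pvGet b j ≠ -1 then some (pvGet b j) else none

theorem MofA_eq_some {v b : List Int} {j l : Int} :
    MofA v b j = some l ↔ (0 ≤ j ∧ j < (v.length : Int) ∧ pvGet b j ≠ -1 ∧ pvGet b j = l) := by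
  unfold MofA
  split_ifs with h
  · simp only [Option.some.injEq]
    constructor
    · rintro rfl; exact ⟨h.1, h.2.1, h.2.2, rfl⟩
    · rintro ⟨_, _, _, h4⟩; exact h4
  · simp only [false_iff, reduceCtorEq]
    rintro ⟨h1, h2, h3, -⟩
    exact h (⟨h1, h2, h3⟩)

theorem MofA_eq_none {v b : List Int} {j : Int} :
    MofA v b j = none ↔ ¬ (0 ≤ j ∧ j < (v.length : Int) ∧ pvGet b j ≠ -1) := by
  unfold MofA
  split_ifs with h <;> simp [h]

theorem MofA_set {v b : List Int} (hb : b.length = v.length) {i : Int} (w : Int)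
    (hi0 : 0 ≤ i) (hin : i < (v.length : Int)) (j : Int) :
    MofA v (pvSet b i w) j = if j = i then (if w ≠ -1 then some w else none) else MofA v b j := by
  unfold MofA
  by_cases hne : j = i
  · rw [if_pos hne, hne]
    rw [pvGet_pvSet b i i w hi0 (by omega) hi0 (by omega), if_pos rfl]
    by_cases hw : w ≠ -1
    · rw [if_pos ⟨hi0, hin, hw⟩, if_pos hw]
    · rw [if_neg (by tauto), if_neg hw]
  · rw [if_neg hne]
    by_cases hj : 0 ≤ j ∧ j < (v.length : Int)
    · rw [pvGet_pvSet b i j w hi0 (by omega) hj.1 (by omega), if_neg hne]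
    · rw [if_neg (by tauto), if_neg (by tauto)]

-- the set of stamped rights

def VSt (v f : List Int) (s : Int) : Finset ℕ :=
  (Finset.range v.length).filter (fun i : Nat => pvGet f (i : Int) = s)

theorem VSt_set_card (v f : List Int) (s i : Int) (hf : f.length = v.length)
    (hi0 : 0 ≤ i) (hin : i < (v.length : Int)) (hns : pvGet f i ≠ s) :
    (VSt v (pvSet f i s) s).card = (VSt v f s).card + 1 := by
  have hset : VSt v (pvSet f i s) s = insert i.toNat (VSt v f s) := by
    unfold VSt
    ext j
    simp only [Finset.mem_filter, Finset.mem_range, Finset.mem_insert]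
    constructor
    · rintro ⟨hj1, hj2⟩
      rw [pvGet_pvSet f i (j : Int) s hi0 (by omega) (by omega) (by omega)] at hj2
      by_cases hc : (j : Int) = i
      · left; omega
      · rw [if_neg hc] at hj2; right; exact ⟨hj1, hj2⟩
    · rintro (hj | ⟨hj1, hj2⟩)
      · subst hj
        refine ⟨by omega, ?_⟩
        rw [pvGet_pvSet f i _ s hi0 (by omega) (by omega) (by omega), if_pos (by omega)]
      · refine ⟨hj1, ?_⟩
        rw [pvGet_pvSet f i _ s hi0 (by omega) (by omega) (by omega)]
        have : (j : Int) ≠ i := by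
          intro hc
          rw [hc] at hj2
          exact hns hj2
        rw [if_neg this]
        exact hj2
  rw [hset, Finset.card_insert_of_notMem]
  unfold VSt
  simp only [Finset.mem_filter, Finset.mem_range, not_and]
  intro _
  have : ((i.toNat : Nat) : Int) = i := by omega
  rw [this]
  exact hns

theorem pyIdx_lt {n : Nat} {j : Int} {m : Nat} (h : PySem.List.pyIdx? n j = some m) : m < n := by
  unfold PySem.List.pyIdx? at h
  split_ifs at h with h1 h2 h3
  · cases h; omega
  · cases h; omega

theorem pvGet_cell_eq {l : List Int} {j : Int} {m : Nat}
    (hidx : PySem.List.pyIdx? l.length j = some m) : pvGet l j = pvGet l (m : Int) := by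
  have hm := pyIdx_lt hidx
  unfold pvGet PySem.List.pyGetD PySem.List.pyGet?
  rw [hidx]
  have : PySem.List.pyIdx? l.length (m : Int) = some m := by
    unfold PySem.List.pyIdx?
    rw [if_pos (by omega), if_pos (by exact_mod_cast hm)]
    simp
  rw [this]

theorem pvGet_set_cell {l : List Int} {i j w : Int} (h0 : 0 ≤ i) (h : i < (l.length : Int))
    (hidx : PySem.List.pyIdx? l.length j = some i.toNat) : pvGet (pvSet l i w) j = w := by
  unfold pvGet PySem.List.pyGetD PySem.List.pyGet? pvSet
  rw [List.length_set, hidx]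
  simp only [Option.bind_some]
  rw [List.getElem?_set_self (by omega)]
  rfl

theorem pvGet_set_cellne {l : List Int} {i j w : Int} (h0 : 0 ≤ i) (h : i < (l.length : Int))
    (hidx : PySem.List.pyIdx? l.length j ≠ some i.toNat) : pvGet (pvSet l i w) j = pvGet l j := by
  unfold pvGet PySem.List.pyGetD PySem.List.pyGet? pvSet
  rw [List.length_set]
  cases hx : PySem.List.pyIdx? l.length j with
  | none => rfl
  | some m =>
    simp only [Option.bind_some]
    have hmi : m ≠ i.toNat := fun hc => hidx (hc ▸ hx)
    rw [List.getElem?_set_ne (by omega)]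

theorem pvGet_set_or (l : List Int) (i w j : Int) (h0 : 0 ≤ i) (h : i < (l.length : Int)) :
    pvGet (pvSet l i w) j = w ∨ pvGet (pvSet l i w) j = pvGet l j := by
  by_cases hidx : PySem.List.pyIdx? l.length j = some i.toNat
  · exact Or.inl (pvGet_set_cell h0 h hidx)
  · exact Or.inr (pvGet_set_cellne h0 h hidx)

-- reading an untouched cell: if the stamp array distinguishes j from i, so does any
-- equally long array

theorem stamp_cellne {v f : List Int} {s i j : Int} (hf : f.length = v.length)
    (hi0 : 0 ≤ i) (hin : i < (v.length : Int))
    (hj : pvGet f j = s) (hi : pvGet f i ≠ s) :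
    PySem.List.pyIdx? v.length j ≠ some i.toNat := by
  intro hc
  have : pvGet f j = pvGet f (i.toNat : Int) := pvGet_cell_eq (by rw [hf]; exact hc)
  rw [this] at hj
  have h2 : ((i.toNat : Nat) : Int) = i := by omega
  rw [h2] at hj
  exact hi hj

theorem solveA_nil (d : PySem.Dict Int (List Int)) (fuel : Nat) (x s : Int) (f b : List Int) :
    pvSolveA fuel d [] x s f b = (0, f, b) := by rw [pvSolveA]

theorem solveA_skip (d : PySem.Dict Int (List Int)) (fuel : Nat) (i x s : Int)
    (rest f b : List Int) (h : pvGet f i = s) :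
    pvSolveA fuel d (i :: rest) x s f b = pvSolveA fuel d rest x s f b := by
  rw [pvSolveA, if_pos h]

theorem solveA_free (d : PySem.Dict Int (List Int)) (fuel : Nat) (i x s : Int)
    (rest f b : List Int) (h : ¬ pvGet f i = s) (hb : pvGet b i = -1) :
    pvSolveA fuel d (i :: rest) x s f b = (1, pvSet f i s, pvSet b i x) := by
  rw [pvSolveA, if_neg h, if_pos hb]

theorem solveA_step (d : PySem.Dict Int (List Int)) (fuel' : Nat) (i x s : Int)
    (rest f b : List Int) (hf : ¬ pvGet f i = s) (hb : ¬ pvGet b i = -1) :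
    pvSolveA (fuel' + 1) d (i :: rest) x s f b =
      (match pvSolveA fuel' d (d.getD (pvGet b i) []) (pvGet b i) s (pvSet f i s) b with
       | (r, f2, b2) => if r = 1 then (1, f2, pvSet b2 i x)
         else pvSolveA (fuel' + 1) d rest x s f2 b2) := by
  rw [pvSolveA, if_neg hf, if_neg hb]

theorem VSt_mono {v fA fB : List Int} {s : Int}
    (h : ∀ i : Int, pvGet fA i = s → pvGet fB i = s) :
    (VSt v fA s).card ≤ (VSt v fB s).card := by
  apply Finset.card_le_card
  intro j hj
  obtain ⟨h1, h2⟩ := Finset.mem_filter.mp hj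
  exact Finset.mem_filter.mpr ⟨h1, h (j : Int) h2⟩

theorem solveA_main (k : Int) (v : List Int) (s : Int) :
    ∀ (fuel : Nat) (ns : List Int) (x : Int) (f b : List Int),
    f.length = v.length → b.length = v.length →
    (∀ j l, MofA v b j = some l → EdgeKV k v l j) →
    (∀ j j' l, MofA v b j = some l → MofA v b j' = some l → j = j') →
    InRg v x →
    (∀ i ∈ ns, EdgeKV k v x i) →
    (∀ j, MofA v b j = some x → pvGet f j = s) →
    v.length ≤ fuel + (VSt v f s).card →
    ∀ res f' b', pvSolveA fuel (pvBuildD k v) ns x s f b = (res, f', b') →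
      (f'.length = v.length ∧ b'.length = v.length ∧
      (∀ i, pvGet f' i = pvGet f i ∨ pvGet f' i = s) ∧
      (∀ i, pvGet f i = s → pvGet f' i = s) ∧
      ((res = 0 ∧ b' = b ∧
          (∀ i ∈ ns, pvGet f' i = s) ∧
          (∀ i, InRg v i → pvGet f' i = s → pvGet f i ≠ s →
            pvGet b i ≠ -1 ∧ ∀ r', EdgeKV k v (pvGet b i) r' → pvGet f' r' = s)) ∨
       (res = 1 ∧
          (∀ j, pvGet f j = s → pvGet b' j = pvGet b j) ∧
          (∃ rs, InRg v rs ∧ MofA v b rs = none ∧ (MofA v b' rs).isSome ∧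
              ∀ j, j ≠ rs → (MofA v b' j).isSome = (MofA v b j).isSome) ∧
          (∀ j l, MofA v b' j = some l → EdgeKV k v l j) ∧
          (∀ l, lMt (MofA v b') l ↔ (lMt (MofA v b) l ∨ l = x)) ∧
          (∀ j j' l, j ≠ j' → MofA v b' j = some l → MofA v b' j' = some l →
            l = x ∧ (MofA v b j = some x ∨ MofA v b j' = some x)) ∧
          (∃ jp, MofA v b' jp = some x ∧ pvGet f jp ≠ s) ∧
          (∀ j l, MofA v b' j = some l → MofA v b j ≠ some l →
            (l = x ∨ ∃ j', pvGet f j' ≠ s ∧ MofA v b j' = some l))))) := by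
  intro fuel ns x f b
  induction fuel, ns, x, f, b using pvSolveA.induct (d := pvBuildD k v) (s := s) with
  | case1 fuel x f b =>
    intro hf hb hwf hinj hxr hns hx hfuel res f' b' heq
    rw [solveA_nil] at heq
    cases heq
    refine ⟨hf, hb, fun i => Or.inl rfl, fun i h => h, Or.inl ⟨rfl, rfl, ?_, ?_⟩⟩
    · intro i hi; exact absurd hi (List.not_mem_nil)
    · intro i _ h1 h2; exact absurd h1 h2
  | case2 fuel x f b i rest hskip ih =>
    intro hf hb hwf hinj hxr hns hx hfuel res f' b' heq
    rw [solveA_skip _ _ _ _ _ _ _ _ hskip] at heq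
    have := ih hf hb hwf hinj hxr (fun i' hi' => hns i' (List.mem_cons_of_mem _ hi')) hx hfuel
      res f' b' heq
    obtain ⟨h1, h2, h3, h4, h5⟩ := this
    refine ⟨h1, h2, h3, h4, ?_⟩
    rcases h5 with ⟨e0, e1, e2, e3⟩ | hsucc
    · refine Or.inl ⟨e0, e1, ?_, e3⟩
      intro i' hi'
      rcases List.mem_cons.mp hi' with rfl | hi''
      · exact h4 _ hskip
      · exact e2 i' hi''
    · exact Or.inr hsucc
  | case3 fuel x f b i rest hfi hbi =>
    intro hf hb hwf hinj hxr hns hx hfuel res f' b' heq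
    rw [solveA_free _ _ _ _ _ _ _ _ hfi hbi] at heq
    obtain ⟨h1, h2, h3⟩ : (1 : Int) = res ∧ pvSet f i s = f' ∧ pvSet b i x = b' := by
      simpa [Prod.ext_iff] using heq
    subst h1; subst h2; subst h3
    have hEi : EdgeKV k v x i := hns i List.mem_cons_self
    have hi0 : 0 ≤ i := (edge_rangeR hEi).1
    have hin : i < (v.length : Int) := (edge_rangeR hEi).2
    have hx0 : 0 ≤ x := hxr.1
    have hxn1 : x ≠ -1 := by omega
    have hMi : MofA v b i = none := by
      rw [MofA_eq_none]
      rintro ⟨-, -, hc⟩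
      exact hc hbi
    have hMset := MofA_set (v := v) hb x hi0 hin
    refine ⟨by rw [length_pvSet, hf], by rw [length_pvSet, hb], ?_, ?_, Or.inr ⟨rfl, ?_, ?_, ?_, ?_, ?_, ?_, ?_⟩⟩
    · intro ii
      exact (pvGet_set_or f i s ii hi0 (by rw [hf]; exact hin)).symm
    · intro ii hii
      rcases pvGet_set_or f i s ii hi0 (by rw [hf]; exact hin) with h | h
      · rw [h]
      · rw [h]; exact hii
    · intro j hj
      exact pvGet_set_cellne hi0 (by rw [hb]; exact hin)
        (by rw [hb]; exact stamp_cellne hf hi0 hin hj hfi)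
    · refine ⟨i, ⟨hi0, hin⟩, hMi, ?_, ?_⟩
      · rw [hMset i, if_pos rfl, if_pos hxn1]; rfl
      · intro j hji
        rw [hMset j, if_neg hji]
    · intro j l hj
      rw [hMset j] at hj
      by_cases hji : j = i
      · rw [if_pos hji, if_pos hxn1] at hj
        cases hj
        exact hji ▸ hEi
      · rw [if_neg hji] at hj
        exact hwf j l hj
    · intro l
      constructor
      · rintro ⟨j, hj⟩
        rw [hMset j] at hj
        by_cases hji : j = i
        · rw [if_pos hji, if_pos hxn1] at hj
          cases hj
          exact Or.inr rfl
        · rw [if_neg hji] at hj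
          exact Or.inl ⟨j, hj⟩
      · rintro (⟨j, hj⟩ | rfl)
        · have hji : j ≠ i := by
            intro hc
            rw [hc, hMi] at hj
            cases hj
          exact ⟨j, by rw [hMset j, if_neg hji]; exact hj⟩
        · exact ⟨i, by rw [hMset i, if_pos rfl, if_pos hxn1]⟩
    · intro j j' l hjj hj hj'
      rw [hMset j] at hj
      rw [hMset j'] at hj'
      by_cases hji : j = i <;> by_cases hj'i : j' = i
      · exact absurd (hji.trans hj'i.symm) hjj
      · rw [if_pos hji, if_pos hxn1] at hj
        cases hj
        rw [if_neg hj'i] at hj'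
        exact ⟨rfl, Or.inr hj'⟩
      · rw [if_pos hj'i, if_pos hxn1] at hj'
        cases hj'
        rw [if_neg hji] at hj
        exact ⟨rfl, Or.inl hj⟩
      · rw [if_neg hji] at hj
        rw [if_neg hj'i] at hj'
        exact absurd (hinj j j' l hj hj') hjj
    · exact ⟨i, by rw [hMset i, if_pos rfl, if_pos hxn1], hfi⟩
    · intro j l hj hne
      rw [hMset j] at hj
      by_cases hji : j = i
      · rw [if_pos hji, if_pos hxn1] at hj
        cases hj
        exact Or.inl rfl
      · rw [if_neg hji] at hj
        exact absurd hj hne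
  | case4 x f b i rest hfi hbi =>
    intro hf hb hwf hinj hxr hns hx hfuel res f' b' heq
    have hEi : EdgeKV k v x i := hns i List.mem_cons_self
    have hi0 : 0 ≤ i := (edge_rangeR hEi).1
    have hin : i < (v.length : Int) := (edge_rangeR hEi).2
    have hss : VSt v f s ⊂ Finset.range v.length := by
      constructor
      · exact Finset.filter_subset _ _
      · intro hc
        have hmem : i.toNat ∈ VSt v f s := hc (Finset.mem_range.mpr (by omega))
        have := (Finset.mem_filter.mp hmem).2
        have h2 : ((i.toNat : Nat) : Int) = i := by omega
        rw [h2] at this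
        exact hfi this
    have := Finset.card_lt_card hss
    simp only [Finset.card_range] at this
    omega
  | case5 x f b i rest hfi fp hbi fuel' f2 b2 hchild ihc =>
    intro hf hb hwf hinj hxr hns hx hfuel res f' b' heq
    rw [solveA_step _ _ _ _ _ _ _ _ hfi hbi, hchild] at heq
    simp only [] at heq
    obtain ⟨h1, h2, h3⟩ : (1 : Int) = res ∧ f2 = f' ∧ pvSet b2 i x = b' := by
      simpa [Prod.ext_iff] using heq
    subst h1; subst h2; subst h3
    have hEi : EdgeKV k v x i := hns i List.mem_cons_self
    have hi0 : 0 ≤ i := (edge_rangeR hEi).1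
    have hin : i < (v.length : Int) := (edge_rangeR hEi).2
    have hx0 : 0 ≤ x := hxr.1
    have hxn1 : x ≠ -1 := by omega
    have hfin : i < (f.length : Int) := by rw [hf]; exact hin
    have hbin : i < (b.length : Int) := by rw [hb]; exact hin
    have hyM : MofA v b i = some (pvGet b i) := MofA_eq_some.mpr ⟨hi0, hin, hbi, rfl⟩
    have hEy : EdgeKV k v (pvGet b i) i := hwf i _ hyM
    have hyr : InRg v (pvGet b i) := edge_rangeL hEy
    have hfp_i : pvGet (pvSet f i s) i = s := by
      rw [pvGet_pvSet f i i s hi0 hfin hi0 hfin, if_pos rfl]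
    have hfp_mono : ∀ j : Int, pvGet f j = s → pvGet (pvSet f i s) j = s := by
      intro j hj
      rcases pvGet_set_or f i s j hi0 hfin with h | h
      · rw [h]
      · rw [h]; exact hj
    have hdy : (pvBuildD k v).getD (pvGet b i) [] = eligFrom k v (pvGet b i) ((pvGet b i) + 1) :=
      buildD_getD k v _ hyr.1 hyr.2
    have hxy : x ≠ pvGet b i := by
      intro hc
      exact hfi (hx i (by rw [← hc] at hyM; exact hyM))
    have ihc' := ihc (by rw [length_pvSet, hf]) hb hwf hinj hyr
      (by intro i' hi'
          rw [hdy] at hi'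
          exact (mem_eligFrom k v _ i' hyr.1).mp hi')
      (by intro j hj
          have := hinj j i _ hj hyM
          rw [this]
          exact hfp_i)
      (by rw [VSt_set_card v f s i hf hi0 hin hfi]; omega)
      1 f2 b2 hchild
    obtain ⟨hf2len, hb2len, hst_c, hv_c, hbr⟩ := ihc'
    rcases hbr with ⟨h0, -⟩ | ⟨-, Ce2, ⟨rs, hrs1, hrs2, hrs3, hrs4⟩, Ce4, Ce5, Ce6, Ce8, Ce9⟩
    · exact absurd h0 one_ne_zero
    have hb2i : pvGet b2 i = pvGet b i := Ce2 i hfp_i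
    have hM2i : MofA v b2 i = some (pvGet b i) := by
      rw [MofA_eq_some]
      exact ⟨hi0, hin, by rw [hb2i]; exact hbi, hb2i⟩
    have hMset2 : ∀ j, MofA v (pvSet b2 i x) j =
        if j = i then (if x ≠ -1 then some x else none) else MofA v b2 j :=
      MofA_set (v := v) hb2len x hi0 hin
    have hM'i : MofA v (pvSet b2 i x) i = some x := by
      rw [hMset2 i, if_pos rfl, if_pos hxn1]
    have hnonew : ∀ j, MofA v b2 j = some x → MofA v b j = some x := by
      intro j hj
      by_cases hcc : MofA v b j = some x
      · exact hcc
      · rcases Ce9 j x hj hcc with hcx | ⟨j', hj'1, hj'2⟩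
        · exact absurd hcx hxy
        · exact absurd (hfp_mono j' (hx j' hj'2)) hj'1
    have hfp_unst : ∀ j : Int, pvGet (pvSet f i s) j ≠ s → pvGet f j ≠ s :=
      fun j h hc => h (hfp_mono j hc)
    refine ⟨hf2len, by rw [length_pvSet, hb2len], ?_, ?_, Or.inr ⟨rfl, ?_, ?_, ?_, ?_, ?_, ?_, ?_⟩⟩
    · intro ii
      rcases hst_c ii with h | h
      · rcases pvGet_set_or f i s ii hi0 hfin with h2 | h2
        · rw [h, h2]; exact Or.inr rfl
        · rw [h, h2]; exact Or.inl rfl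
      · exact Or.inr h
    · intro ii hii
      exact hv_c ii (hfp_mono ii hii)
    · intro j hj
      have hcell : PySem.List.pyIdx? v.length j ≠ some i.toNat :=
        stamp_cellne hf hi0 hin hj hfi
      rw [pvGet_set_cellne hi0 (by rw [hb2len]; exact hin) (by rw [hb2len]; exact hcell)]
      exact Ce2 j (hfp_mono j hj)
    · refine ⟨rs, hrs1, hrs2, ?_, ?_⟩
      · have hrsi : rs ≠ i := by
          intro hc
          rw [hc, hyM] at hrs2
          cases hrs2
        rw [hMset2 rs, if_neg hrsi]
        exact hrs3
      · intro j hjrs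
        by_cases hji : j = i
        · rw [hji, hM'i, hyM]
          rfl
        · rw [hMset2 j, if_neg hji]
          exact hrs4 j hjrs
    · intro j l hj
      rw [hMset2 j] at hj
      by_cases hji : j = i
      · rw [if_pos hji, if_pos hxn1] at hj
        cases hj
        exact hji ▸ hEi
      · rw [if_neg hji] at hj
        exact Ce4 j l hj
    · intro l
      constructor
      · rintro ⟨j, hj⟩
        rw [hMset2 j] at hj
        by_cases hji : j = i
        · rw [if_pos hji, if_pos hxn1] at hj
          cases hj
          exact Or.inr rfl
        · rw [if_neg hji] at hj
          rcases (Ce5 l).mp ⟨j, hj⟩ with h | rfl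
          · exact Or.inl h
          · exact Or.inl ⟨i, hyM⟩
      · rintro (hl | rfl)
        · have : lMt (MofA v b2) l := (Ce5 l).mpr (Or.inl hl)
          obtain ⟨j₂, hj₂⟩ := this
          by_cases hji : j₂ = i
          · rw [hji, hM2i] at hj₂
            cases hj₂
            obtain ⟨jp, hjp1, hjp2⟩ := Ce8
            have hjpi : jp ≠ i := by
              intro hc
              rw [hc] at hjp2
              exact hjp2 hfp_i
            exact ⟨jp, by rw [hMset2 jp, if_neg hjpi]; exact hjp1⟩
          · exact ⟨j₂, by rw [hMset2 j₂, if_neg hji]; exact hj₂⟩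
        · exact ⟨i, hM'i⟩
    · intro j j' l hjj hj hj'
      rw [hMset2 j] at hj
      rw [hMset2 j'] at hj'
      by_cases hji : j = i <;> by_cases hj'i : j' = i
      · exact absurd (hji.trans hj'i.symm) hjj
      · rw [if_pos hji, if_pos hxn1] at hj
        cases hj
        rw [if_neg hj'i] at hj'
        exact ⟨rfl, Or.inr (hnonew j' hj')⟩
      · rw [if_pos hj'i, if_pos hxn1] at hj'
        cases hj'
        rw [if_neg hji] at hj
        exact ⟨rfl, Or.inl (hnonew j hj)⟩
      · rw [if_neg hji] at hj
        rw [if_neg hj'i] at hj'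
        obtain ⟨hly, hor⟩ := Ce6 j j' l hjj hj hj'
        subst hly
        rcases hor with h | h
        · exact absurd (hinj j i _ h hyM) hji
        · exact absurd (hinj j' i _ h hyM) hj'i
    · exact ⟨i, hM'i, hfi⟩
    · intro j l hj hne
      rw [hMset2 j] at hj
      by_cases hji : j = i
      · rw [if_pos hji, if_pos hxn1] at hj
        cases hj
        exact Or.inl rfl
      · rw [if_neg hji] at hj
        by_cases hcc : MofA v b j = some l
        · exact absurd hcc hne
        · rcases Ce9 j l hj hcc with rfl | ⟨j', hj'1, hj'2⟩
          · exact Or.inr ⟨i, hfi, hyM⟩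
          · exact Or.inr ⟨j', hfp_unst j' hj'1, hj'2⟩
  | case6 x f b i rest hfi fp hbi fuel' r f2 b2 hchild hr1 ihc ihr =>
    intro hf hb hwf hinj hxr hns hx hfuel res f' b' heq
    rw [solveA_step _ _ _ _ _ _ _ _ hfi hbi, hchild] at heq
    simp only [if_neg hr1] at heq
    have hEi : EdgeKV k v x i := hns i List.mem_cons_self
    have hi0 : 0 ≤ i := (edge_rangeR hEi).1
    have hin : i < (v.length : Int) := (edge_rangeR hEi).2
    have hfin : i < (f.length : Int) := by rw [hf]; exact hin
    have hyM : MofA v b i = some (pvGet b i) := MofA_eq_some.mpr ⟨hi0, hin, hbi, rfl⟩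
    have hEy : EdgeKV k v (pvGet b i) i := hwf i _ hyM
    have hyr : InRg v (pvGet b i) := edge_rangeL hEy
    have hfp_i : pvGet (pvSet f i s) i = s := by
      rw [pvGet_pvSet f i i s hi0 hfin hi0 hfin, if_pos rfl]
    have hfp_mono : ∀ j : Int, pvGet f j = s → pvGet (pvSet f i s) j = s := by
      intro j hj
      rcases pvGet_set_or f i s j hi0 hfin with h | h
      · rw [h]
      · rw [h]; exact hj
    have hdy : (pvBuildD k v).getD (pvGet b i) [] = eligFrom k v (pvGet b i) ((pvGet b i) + 1) :=
      buildD_getD k v _ hyr.1 hyr.2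
    have ihc' := ihc (by rw [length_pvSet, hf]) hb hwf hinj hyr
      (by intro i' hi'
          rw [hdy] at hi'
          exact (mem_eligFrom k v _ i' hyr.1).mp hi')
      (by intro j hj
          have := hinj j i _ hj hyM
          rw [this]
          exact hfp_i)
      (by rw [VSt_set_card v f s i hf hi0 hin hfi]; omega)
      r f2 b2 hchild
    obtain ⟨hf2len, hb2len, hst_c, hv_c, hbr⟩ := ihc'
    rcases hbr with ⟨-, hb2b, hnsc, hclo_c⟩ | ⟨hr, -⟩
    swap
    · exact absurd hr hr1
    subst hb2b
    have hmono_f2 : ∀ j : Int, pvGet f j = s → pvGet f2 j = s := by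
      intro j hj
      exact hv_c j (hfp_mono j hj)
    have ihr' := ihr hf2len hb hwf hinj hxr
      (fun i' hi' => hns i' (List.mem_cons_of_mem _ hi'))
      (fun j hj => hmono_f2 j (hx j hj))
      (by have := VSt_mono (v := v) (s := s) hmono_f2
          have h2 := VSt_set_card v f s i hf hi0 hin hfi
          have h3 := VSt_mono (v := v) (s := s) hv_c
          rw [h2] at h3
          omega)
      res f' b' heq
    obtain ⟨hflen, hblen, hst_r, hv_r, hbr_r⟩ := ihr'
    refine ⟨hflen, hblen, ?_, ?_, ?_⟩
    · intro ii
      rcases hst_r ii with h | h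
      · rcases hst_c ii with h2 | h2
        · rcases pvGet_set_or f i s ii hi0 hfin with h3 | h3
          · rw [h, h2, h3]; exact Or.inr rfl
          · rw [h, h2, h3]; exact Or.inl rfl
        · rw [h, h2]; exact Or.inr rfl
      · exact Or.inr h
    · intro ii hii
      exact hv_r ii (hmono_f2 ii hii)
    · rcases hbr_r with ⟨h0, hbb, hnsr, hclo_r⟩ | ⟨h1r, Re2, Re3, Re4, Re5, Re6, Re8, Re9⟩
      · refine Or.inl ⟨h0, hbb, ?_, ?_⟩
        · intro i' hi'
          rcases List.mem_cons.mp hi' with rfl | hi''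
          · exact hv_r i' (hv_c i' hfp_i)
          · exact hnsr i' hi''
        · intro ii hiir hii_s hii_ns
          by_cases hii2 : pvGet f2 ii = s
          · by_cases hii1 : pvGet (pvSet f i s) ii = s
            · have hiieq : ii = i := by
                have := pvGet_pvSet f i ii s hi0 hfin hiir.1 (by rw [hf]; exact hiir.2)
                rw [this] at hii1
                by_cases hc : ii = i
                · exact hc
                · rw [if_neg hc] at hii1
                  exact absurd hii1 hii_ns
              rw [hiieq]
              refine ⟨hbi, ?_⟩
              intro r' hr'
              have hr'mem : r' ∈ (pvBuildD k v).getD (pvGet b2 i) [] := by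
                rw [hdy]
                exact (mem_eligFrom k v _ r' hyr.1).mpr hr'
              exact hv_r r' (hnsc r' hr'mem)
            · obtain ⟨hcl1, hcl2⟩ := hclo_c ii hiir hii2 hii1
              exact ⟨hcl1, fun r' hr' => hv_r r' (hcl2 r' hr')⟩
          · exact hclo_r ii hiir hii_s hii2
      · refine Or.inr ⟨h1r, ?_, Re3, Re4, Re5, Re6, ?_, ?_⟩
        · intro j hj
          exact Re2 j (hmono_f2 j hj)
        · obtain ⟨jp, hjp1, hjp2⟩ := Re8
          exact ⟨jp, hjp1, fun hc => hjp2 (hmono_f2 jp hc)⟩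
        · intro j l hj hne
          rcases Re9 j l hj hne with h | ⟨j', hj'1, hj'2⟩
          · exact Or.inl h
          · exact Or.inr ⟨j', fun hc => hj'1 (hmono_f2 j' hc), hj'2⟩

theorem msize_succ (v : List Int) (M M' : Int → Option Int)
    (h : ∃ rs, InRg v rs ∧ M rs = none ∧ (M' rs).isSome ∧
      ∀ j, j ≠ rs → (M' j).isSome = (M j).isSome) :
    msize v M' = msize v M + 1 := by
  obtain ⟨rs, hrg, hnone, hsome, hoff⟩ := h
  unfold msize
  obtain ⟨h0, h1⟩ := hrg
  have hrn : rs.toNat < v.length := by omega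
  have hrt : ((rs.toNat : Int)) = rs := by omega
  have hset : (Finset.range v.length).filter (fun j : Nat => (M' (j : Int)).isSome) =
      insert rs.toNat ((Finset.range v.length).filter (fun j : Nat => (M (j : Int)).isSome)) := by
    ext j
    simp only [Finset.mem_filter, Finset.mem_insert, Finset.mem_range]
    constructor
    · rintro ⟨hj1, hj2⟩
      by_cases hjr : (j : Int) = rs
      · left; omega
      · right
        exact ⟨hj1, by rw [← hoff (j : Int) hjr]; exact hj2⟩
    · rintro (hj | ⟨hj1, hj2⟩)
      · subst hj
        exact ⟨hrn, by rw [hrt]; exact hsome⟩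
      · by_cases hjr : (j : Int) = rs
        · exact ⟨hj1, by rw [hjr]; exact hsome⟩
        · exact ⟨hj1, by rw [hoff (j : Int) hjr]; exact hj2⟩
  rw [hset, Finset.card_insert_of_notMem]
  simp only [Finset.mem_filter, Finset.mem_range, not_and]
  intro _
  rw [hrt, hnone]
  simp

-- one full root phase of A

theorem phaseA (k : Int) (v : List Int) (t : Int) (c : Int) (f b : List Int)
    (hf : f.length = v.length) (hb : b.length = v.length)
    (hM : IsM k v (MofA v b)) (hBdd : BddM (MofA v b) t)
    (hc : c = (msize v (MofA v b) : Int))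
    (hfresh : ∀ i : Int, InRg v i → pvGet f i < t)
    (hmax : MaxUpTo k v (MofA v b) t)
    (ht0 : 0 ≤ t) (htn : t < (v.length : Int)) :
    ∀ r f' b', pvSolveA v.length (pvBuildD k v) ((pvBuildD k v).getD t []) t t f b = (r, f', b') →
      (f'.length = v.length ∧ b'.length = v.length ∧
       IsM k v (MofA v b') ∧ BddM (MofA v b') (t + 1) ∧
       c + r = (msize v (MofA v b') : Int) ∧
       (∀ i : Int, InRg v i → pvGet f' i < t + 1) ∧
       MaxUpTo k v (MofA v b') (t + 1)) := by
  intro r f' b' heq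
  have hdt : (pvBuildD k v).getD t [] = eligFrom k v t (t + 1) := buildD_getD k v t ht0 htn
  have hmain := solveA_main k v t v.length (eligFrom k v t (t+1)) t f b hf hb hM.1 hM.2
    ⟨ht0, htn⟩
    (fun i hi => (mem_eligFrom k v t i ht0).mp hi)
    (fun j hj => absurd (hBdd j t hj) (by omega))
    (by omega)
    r f' b' (by rw [← hdt]; exact heq)
  obtain ⟨hflen, hblen, hst, hv, hbr⟩ := hmain
  have hfresh' : ∀ i : Int, InRg v i → pvGet f' i < t + 1 := by
    intro i hi
    rcases hst i with h | h
    · rw [h]; have := hfresh i hi; omega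
    · rw [h]; omega
  rcases hbr with ⟨hr0, hbb, hnss, hclo⟩ | ⟨hr1, he2, he3, he4, he5, he6, he8, he9⟩
  · rw [hbb]
    have hnoaug : NoAugFrom k v (MofA v b) t := by
      have hstamped : ∀ rr, ReachKV k v (MofA v b) t rr → pvGet f' rr = t := by
        intro rr hrr
        induction hrr with
        | base rr hre =>
          exact hnss rr ((mem_eligFrom k v t rr ht0).mpr hre)
        | step rr xm rr' hrch hmr hre ih =>
          have hrrg : InRg v rr := edge_rangeR (hM.1 _ _ hmr)
          obtain ⟨hg0, hg1, hg2, hg3⟩ := MofA_eq_some.mp hmr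
          have hfr : pvGet f rr ≠ t := by have := hfresh rr hrrg; omega
          obtain ⟨-, hcl⟩ := hclo rr hrrg ih hfr
          refine hcl rr' ?_
          rw [hg3]
          exact hre
      intro rr hrr hnone
      have hstm := hstamped rr hrr
      have hrrg : InRg v rr := by
        cases hrr with
        | base _ hre => exact edge_rangeR hre
        | step _ xm _ hrch hmr hre => exact edge_rangeR hre
      have hfr : pvGet f rr ≠ t := by have := hfresh rr hrrg; omega
      obtain ⟨hbne, -⟩ := hclo rr hrrg hstm hfr
      rw [MofA_eq_none] at hnone
      exact hnone ⟨hrrg.1, hrrg.2, hbne⟩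
    refine ⟨hflen, hb, hM, ?_, by rw [hr0]; simpa using hc, hfresh', ?_⟩
    · intro j l hj
      have := hBdd j l hj
      omega
    · exact max_fail k v (MofA v b) t hM hBdd hmax hnoaug
  · have hinj' : ∀ j j' l, MofA v b' j = some l → MofA v b' j' = some l → j = j' := by
      intro j j' l hj hj'
      by_contra hne
      obtain ⟨hlx, hor⟩ := he6 j j' l hne hj hj'
      rcases hor with h | h
      · exact absurd (hBdd j t h) (by omega)
      · exact absurd (hBdd j' t h) (by omega)
    have hM' : IsM k v (MofA v b') := ⟨he4, hinj'⟩
    have hmsz : msize v (MofA v b') = msize v (MofA v b) + 1 := msize_succ v _ _ he3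
    refine ⟨hflen, hblen, hM', ?_, ?_, hfresh', ?_⟩
    · intro j l hj
      rcases (he5 l).mp ⟨j, hj⟩ with h | hlt
      · obtain ⟨j₂, hj₂⟩ := h
        have := hBdd j₂ l hj₂
        omega
      · omega
    · rw [hr1, hmsz, hc]; push_cast; ring
    · exact max_succ k v (MofA v b) (MofA v b') t hmax hmsz

theorem outerA (k : Int) (v : List Int) :
    ∀ (tN : Nat) (t c : Int) (f b : List Int),
    ((v.length : Int) - t).toNat = tN → 0 ≤ t →
    f.length = v.length → b.length = v.length →
    IsM k v (MofA v b) → BddM (MofA v b) t →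
    c = (msize v (MofA v b) : Int) →
    (∀ i : Int, InRg v i → pvGet f i < t) →
    MaxUpTo k v (MofA v b) t →
    ∃ M, IsM k v M ∧ MaxUpTo k v M ((v.length : Int)) ∧
      ((PySem.List.pyRange t (v.length : Int) 1).foldl
        (fun st i =>
          match st with
          | (c, f, b) =>
            match pvSolveA v.length (pvBuildD k v) ((pvBuildD k v).getD i []) i i f b with
            | (r, f', b') => (c + r, f', b')) (c, f, b)).1 = (msize v M : Int) := by
  intro tN
  induction tN with
  | zero =>
    intro t c f b ht h0 hf hb hM hBdd hc hfresh hmax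
    rw [PySem.List.pyRange_one_eq_nil (by omega : (v.length : Int) ≤ t)]
    refine ⟨MofA v b, hM, ?_, by simpa using hc⟩
    intro N hN hNb
    refine hmax N hN ?_
    intro j l hj
    have := hNb j l hj
    omega
  | succ tN ih =>
    intro t c f b ht h0 hf hb hM hBdd hc hfresh hmax
    have hlt : t < (v.length : Int) := by omega
    rw [PySem.List.pyRange_one_cons hlt]
    simp only [List.foldl_cons]
    rcases hphase : pvSolveA v.length (pvBuildD k v) ((pvBuildD k v).getD t []) t t f b
      with ⟨r, f', b'⟩
    obtain ⟨hf', hb', hM', hBdd', hc', hfresh', hmax'⟩ :=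
      phaseA k v t c f b hf hb hM hBdd hc hfresh hmax h0 hlt r f' b' hphase
    exact ih (t + 1) (c + r) f' b' (by omega) (by omega) hf' hb' hM' hBdd' hc' hfresh' hmax'

theorem msize_zero_init (k : Int) (v : List Int) :
    ∀ j, MofA v (List.replicate v.length (-1 : Int)) j = none := by
  intro j
  rw [MofA_eq_none]
  rintro ⟨h1, h2, h3⟩
  exact h3 (pvGet_replicate v.length (-1) j h1 h2)

theorem A_char (k : Int) (v : List Int) :
    ∃ M, IsM k v M ∧ MaxUpTo k v M ((v.length : Int)) ∧
      problemSolving k v = (v.length : Int) - (msize v M : Int) := by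
  have hnone := msize_zero_init k v
  have hM0 : IsM k v (MofA v (List.replicate v.length (-1 : Int))) := by
    constructor
    · intro j l hj; rw [hnone j] at hj; cases hj
    · intro j j' l hj hj'; rw [hnone j] at hj; cases hj
  have hmsz0 : msize v (MofA v (List.replicate v.length (-1 : Int))) = 0 := by
    unfold msize
    rw [Finset.card_eq_zero]
    ext j
    simp only [Finset.mem_filter, Finset.notMem_empty, iff_false, not_and]
    intro _
    rw [hnone]
    simp
  obtain ⟨M, hM, hmax, hres⟩ := outerA k v ((v.length : Int) - 0).toNat 0 0
    (List.replicate v.length (-1 : Int)) (List.replicate v.length (-1 : Int))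
    rfl le_rfl (by simp) (by simp) hM0
    (by intro j l hj; rw [hnone j] at hj; cases hj)
    (by rw [hmsz0]; simp)
    (by intro i hi; rw [pvGet_replicate v.length (-1) i hi.1 hi.2]; omega)
    (by intro N hN hNb
        rw [hmsz0]
        have : ∀ j : Int, N j = none := by
          intro j
          cases hNj : N j with
          | none => rfl
          | some l =>
            have h1 := hN.1 j l hNj
            have h2 := hNb j l hNj
            have := h1.1
            omega
        unfold msize
        have hempty : (Finset.range v.length).filter (fun j : Nat => (N (j : Int)).isSome) = ∅ := by
          ext j
          simp only [Finset.mem_filter, Finset.notMem_empty, iff_false, not_and]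
          intro _
          rw [this]
          simp
        rw [hempty]
        simp)
  exact ⟨M, hM, hmax, by simp only [problemSolving]; rw [hres]⟩

-- ===== B-side =====

inductive ChainB (k : Int) (v ml par : List Int) : Int → Nat → Prop
  | zero : ∀ j, EdgeKV k v (pvGet par j) j → pvGet ml (pvGet par j) = -1 → ChainB k v ml par j 0
  | succ : ∀ j m, EdgeKV k v (pvGet par j) j → pvGet ml (pvGet par j) ≠ -1 →
      pvGet ml (pvGet par j) ≠ j → ChainB k v ml par (pvGet ml (pvGet par j)) m →
      ChainB k v ml par j (m + 1)

theorem chainB_det {k : Int} {v ml par : List Int} :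
    ∀ {m : Nat} {j : Int}, ChainB k v ml par j m → ∀ {m'}, ChainB k v ml par j m' → m = m' := by
  intro m
  induction m with
  | zero =>
    intro j h m' h'
    cases h with
    | zero _j he hml =>
      cases h' with
      | zero _j2 he2 hml2 => rfl
      | succ _j2 _m2 he2 hml2 hne2 hc2 => exact absurd hml hml2
  | succ m ih =>
    intro j h m' h'
    cases h with
    | succ _j _m he hml hne hc =>
      cases h' with
      | zero _j2 he2 hml2 => exact absurd hml2 hml
      | succ _j2 _m2 he2 hml2 hne2 hc2 => rw [ih hc hc2]

theorem chainB_lt {k : Int} {v ml par : List Int} :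
    ∀ {m : Nat} {j : Int}, ChainB k v ml par j m →
      ∃ L : List Int, L.length = m + 1 ∧ L.Nodup ∧ (∀ r ∈ L, InRg v r) ∧
        (∀ r ∈ L, ∃ q, q ≤ m ∧ ChainB k v ml par r q) := by
  intro m
  induction m with
  | zero =>
    intro j h
    refine ⟨[j], rfl, by simp, ?_, ?_⟩
    · intro r hr
      simp only [List.mem_singleton] at hr
      subst hr
      cases h with
      | zero _j he hml => exact edge_rangeR he
    · intro r hr
      simp only [List.mem_singleton] at hr
      subst hr
      exact ⟨0, le_rfl, h⟩
  | succ m ih =>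
    intro j h
    cases h with
    | succ _j _m he hml hne hc =>
      obtain ⟨L, hlen, hnd, hrg, hq⟩ := ih hc
      refine ⟨j :: L, by simp [hlen], ?_, ?_, ?_⟩
      · rw [List.nodup_cons]
        refine ⟨?_, hnd⟩
        intro hj
        obtain ⟨q, hqm, hqc⟩ := hq j hj
        have := chainB_det hqc (ChainB.succ j m he hml hne hc)
        omega
      · intro r hr
        rcases List.mem_cons.mp hr with rfl | hr'
        · exact edge_rangeR he
        · exact hrg r hr'
      · intro r hr
        rcases List.mem_cons.mp hr with rfl | hr'
        · exact ⟨m + 1, le_rfl, ChainB.succ r m he hml hne hc⟩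
        · obtain ⟨q, hqm, hqc⟩ := hq r hr'
          exact ⟨q, by omega, hqc⟩

theorem nodup_inr_length {v : List Int} {L : List Int}
    (hnd : L.Nodup) (hrg : ∀ r ∈ L, InRg v r) : L.length ≤ v.length := by
  classical
  have hmap : (L.map Int.toNat).Nodup := by
    refine List.Nodup.map_on ?_ hnd
    intro a ha b hb hab
    obtain ⟨h1a, h1b⟩ := hrg a ha
    obtain ⟨h2a, h2b⟩ := hrg b hb
    omega
  have hsub : (L.map Int.toNat).toFinset ⊆ Finset.range v.length := by
    intro x hx
    rw [List.mem_toFinset] at hx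
    obtain ⟨a, ha, rfl⟩ := List.mem_map.mp hx
    obtain ⟨h1, h2⟩ := hrg a ha
    exact Finset.mem_range.mpr (by omega)
  have := Finset.card_le_card hsub
  rw [List.toFinset_card_of_nodup hmap] at this
  simpa using this

theorem chainB_bound {k : Int} {v ml par : List Int} {m : Nat} {j : Int}
    (h : ChainB k v ml par j m) : m + 1 ≤ v.length := by
  obtain ⟨L, hlen, hnd, hrg, -⟩ := chainB_lt h
  have := nodup_inr_length hnd hrg
  omega

theorem pyIdx_inrange {n : Nat} {a : Int} (h0 : 0 ≤ a) (h : a < (n : Int)) :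
    PySem.List.pyIdx? n a = some a.toNat := by
  unfold PySem.List.pyIdx?
  rw [if_pos h0, if_pos h]

theorem cellne_of_ne {n : Nat} {a b : Int} (ha0 : 0 ≤ a) (han : a < (n : Int))
    (hb0 : 0 ≤ b) (hbn : b < (n : Int)) (hne : a ≠ b) :
    PySem.List.pyIdx? n a ≠ some b.toNat := by
  rw [pyIdx_inrange ha0 han]
  intro hc
  have := Option.some.inj hc
  omega

theorem chainB_mono {k : Int} {v ml par par' : List Int}
    (hgrow : ∀ jj : Int, InRg v jj → pvGet par jj ≠ -1 → pvGet par' jj = pvGet par jj) :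
    ∀ {m : Nat} {j : Int}, ChainB k v ml par j m → ChainB k v ml par' j m := by
  intro m
  induction m with
  | zero =>
    intro j h
    cases h with
    | zero _j he hml =>
      have hrg : InRg v j := edge_rangeR he
      have hpne : pvGet par j ≠ -1 := by have := he.1; omega
      have heq := hgrow j hrg hpne
      exact ChainB.zero j (by rw [heq]; exact he) (by rw [heq]; exact hml)
  | succ m ih =>
    intro j h
    cases h with
    | succ _j _m he hml hne hc =>
      have hrg : InRg v j := edge_rangeR he
      have hpne : pvGet par j ≠ -1 := by have := he.1; omega
      have heq := hgrow j hrg hpne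
      exact ChainB.succ j m (by rw [heq]; exact he) (by rw [heq]; exact hml)
        (by rw [heq]; exact hne) (by rw [heq]; exact ih hc)

theorem chainB_update {k : Int} {v ml par : List Int} {x w : Int}
    (hml : ml.length = v.length) (hx : InRg v x) :
    ∀ {p : Nat} {j₂ : Int}, ChainB k v ml par j₂ p →
      (∀ (jj : Int) (q : Nat), q ≤ p → ChainB k v ml par jj q → pvGet par jj ≠ x) →
      ChainB k v (pvSet ml x w) par j₂ p := by
  intro p
  induction p with
  | zero =>
    intro j₂ h hav
    cases h with
    | zero _j he hm =>
      have hpx : pvGet par j₂ ≠ x := hav j₂ 0 le_rfl (ChainB.zero j₂ he hm)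
      have hprg : InRg v (pvGet par j₂) := edge_rangeL he
      have hcell : pvGet (pvSet ml x w) (pvGet par j₂) = pvGet ml (pvGet par j₂) :=
        pvGet_set_cellne hx.1 (by rw [hml]; exact hx.2)
          (by rw [hml]; exact cellne_of_ne hprg.1 hprg.2 hx.1 hx.2 hpx)
      exact ChainB.zero j₂ he (by rw [hcell]; exact hm)
  | succ p ih =>
    intro j₂ h hav
    cases h with
    | succ _j _m he hm hne hc =>
      have hpx : pvGet par j₂ ≠ x :=
        hav j₂ (p + 1) le_rfl (ChainB.succ j₂ p he hm hne hc)
      have hprg : InRg v (pvGet par j₂) := edge_rangeL he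
      have hcell : pvGet (pvSet ml x w) (pvGet par j₂) = pvGet ml (pvGet par j₂) :=
        pvGet_set_cellne hx.1 (by rw [hml]; exact hx.2)
          (by rw [hml]; exact cellne_of_ne hprg.1 hprg.2 hx.1 hx.2 hpx)
      refine ChainB.succ j₂ p he (by rw [hcell]; exact hm)
        (by rw [hcell]; exact hne) ?_
      rw [hcell]
      exact ih hc (fun jj q hq hcq => hav jj q (by omega) hcq)

theorem pvFlip_neg1 (par : List Int) (fuel : Nat) (ml mr : List Int) :
    pvFlip par fuel ml mr (-1) = (ml, mr) := by
  rw [pvFlip.eq_def]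
  dsimp only
  simp

theorem pvFlip_step (par : List Int) (fuel' : Nat) (ml mr : List Int) {j : Int} (h : j ≠ -1) :
    pvFlip par (fuel' + 1) ml mr j =
      pvFlip par fuel' (pvSet ml (pvGet par j) j) (pvSet mr j (pvGet par j))
        (pvGet ml (pvGet par j)) := by
  rw [pvFlip.eq_def]
  dsimp only
  rw [if_neg h]

theorem flipB (k : Int) (v par : List Int) :
    ∀ (m : Nat) (fuel : Nat) (j : Int) (ml mr : List Int),
    ChainB k v ml par j m →
    ml.length = v.length → mr.length = v.length →
    (∀ jj l, MofA v mr jj = some l → EdgeKV k v l jj) →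
    (∀ i, InRg v i → pvGet ml i ≠ -1 → InRg v (pvGet ml i) ∧ pvGet mr (pvGet ml i) = i) →
    (∀ jj, InRg v jj → jj ≠ j → pvGet mr jj ≠ -1 → InRg v (pvGet mr jj) ∧ pvGet ml (pvGet mr jj) = jj) →
    (∀ i, InRg v i → pvGet ml i ≠ j) →
    m + 1 ≤ fuel →
    ∀ ml' mr', pvFlip par fuel ml mr j = (ml', mr') →
      (ml'.length = v.length ∧ mr'.length = v.length ∧
       (∀ jj l, MofA v mr' jj = some l → EdgeKV k v l jj) ∧
       (∀ i, InRg v i → pvGet ml' i ≠ -1 → InRg v (pvGet ml' i) ∧ pvGet mr' (pvGet ml' i) = i) ∧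
       (∀ jj, InRg v jj → pvGet mr' jj ≠ -1 → InRg v (pvGet mr' jj) ∧ pvGet ml' (pvGet mr' jj) = jj) ∧
       (∀ jj, InRg v jj → jj ≠ j → (pvGet mr' jj ≠ -1 ↔ pvGet mr jj ≠ -1)) ∧
       pvGet mr' j ≠ -1) := by
  intro m
  induction m with
  | zero =>
    intro fuel j ml mr hch hmll hmrl hWf hLR hRLx hNoTo hfuel ml' mr' heq
    cases hch with
    | zero _j he hm =>
      obtain ⟨fuel', rfl⟩ : ∃ f', fuel = f' + 1 := ⟨fuel - 1, by omega⟩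
      have hjr : InRg v j := edge_rangeR he
      have hxr : InRg v (pvGet par j) := edge_rangeL he
      have hjne : j ≠ -1 := by obtain ⟨h1, h2⟩ := hjr; omega
      rw [pvFlip_step par fuel' ml mr hjne, hm, pvFlip_neg1] at heq
      obtain ⟨h1, h2⟩ : pvSet ml (pvGet par j) j = ml' ∧ pvSet mr j (pvGet par j) = mr' := by
        simpa [Prod.ext_iff] using heq
      subst h1; subst h2
      have gml : ∀ i : Int, InRg v i →
          pvGet (pvSet ml (pvGet par j) j) i = if i = pvGet par j then j else pvGet ml i := by
        intro i hi
        exact pvGet_pvSet ml _ i j hxr.1 (by rw [hmll]; exact hxr.2) hi.1 (by rw [hmll]; exact hi.2)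
      have gmr : ∀ jj : Int, InRg v jj →
          pvGet (pvSet mr j (pvGet par j)) jj = if jj = j then pvGet par j else pvGet mr jj := by
        intro jj hjj
        exact pvGet_pvSet mr _ jj _ hjr.1 (by rw [hmrl]; exact hjr.2) hjj.1 (by rw [hmrl]; exact hjj.2)
      have hMset := MofA_set (v := v) hmrl (pvGet par j) hjr.1 hjr.2
      refine ⟨by rw [length_pvSet, hmll], by rw [length_pvSet, hmrl], ?_, ?_, ?_, ?_, ?_⟩
      · intro jj l hj
        rw [hMset jj] at hj
        by_cases hjj : jj = j
        · rw [if_pos hjj, if_pos (by obtain ⟨ha, hb⟩ := hxr; omega)] at hj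
          cases hj
          exact hjj ▸ he
        · rw [if_neg hjj] at hj
          exact hWf jj l hj
      · intro i hi hne
        rw [gml i hi] at hne ⊢
        by_cases hix : i = pvGet par j
        · rw [if_pos hix] at hne ⊢
          refine ⟨hjr, ?_⟩
          rw [gmr j hjr, if_pos rfl, hix]
        · rw [if_neg hix] at hne ⊢
          obtain ⟨hr1, hr2⟩ := hLR i hi hne
          refine ⟨hr1, ?_⟩
          rw [gmr _ hr1, if_neg (hNoTo i hi)]
          exact hr2
      · intro jj hjj hne
        rw [gmr jj hjj] at hne ⊢
        by_cases hjeq : jj = j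
        · rw [if_pos hjeq] at hne ⊢
          refine ⟨hxr, ?_⟩
          rw [gml _ hxr, if_pos rfl, hjeq]
        · rw [if_neg hjeq] at hne ⊢
          obtain ⟨hr1, hr2⟩ := hRLx jj hjj hjeq hne
          refine ⟨hr1, ?_⟩
          have hmx : pvGet mr jj ≠ pvGet par j := by
            intro hc
            rw [hc, hm] at hr2
            obtain ⟨ha, hb⟩ := hjj
            omega
          rw [gml _ hr1, if_neg hmx]
          exact hr2
      · intro jj hjj hne
        rw [gmr jj hjj, if_neg hne]
      · rw [gmr j hjr, if_pos rfl]
        obtain ⟨ha, hb⟩ := hxr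
        omega
  | succ m ih =>
    intro fuel j ml mr hch hmll hmrl hWf hLR hRLx hNoTo hfuel ml' mr' heq
    cases hch with
    | succ _j _m he hmlx hnej hc =>
      obtain ⟨fuel', rfl⟩ : ∃ f', fuel = f' + 1 := ⟨fuel - 1, by omega⟩
      have hjr : InRg v j := edge_rangeR he
      have hxr : InRg v (pvGet par j) := edge_rangeL he
      have hjne : j ≠ -1 := by obtain ⟨h1, h2⟩ := hjr; omega
      rw [pvFlip_step par fuel' ml mr hjne] at heq
      have gml : ∀ i : Int, InRg v i →
          pvGet (pvSet ml (pvGet par j) j) i = if i = pvGet par j then j else pvGet ml i := by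
        intro i hi
        exact pvGet_pvSet ml _ i j hxr.1 (by rw [hmll]; exact hxr.2) hi.1 (by rw [hmll]; exact hi.2)
      have gmr : ∀ jj : Int, InRg v jj →
          pvGet (pvSet mr j (pvGet par j)) jj = if jj = j then pvGet par j else pvGet mr jj := by
        intro jj hjj
        exact pvGet_pvSet mr _ jj _ hjr.1 (by rw [hmrl]; exact hjr.2) hjj.1 (by rw [hmrl]; exact hjj.2)
      have hnxtr : InRg v (pvGet ml (pvGet par j)) := (hLR _ hxr hmlx).1
      have hmrnxt : pvGet mr (pvGet ml (pvGet par j)) = pvGet par j := (hLR _ hxr hmlx).2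
      -- the moved chain survives the update of ml at (par j)
      have hc₂ : ChainB k v (pvSet ml (pvGet par j) j) par (pvGet ml (pvGet par j)) m := by
        refine chainB_update hmll hxr hc ?_
        intro jj q hq hcq
        intro hpx
        cases hcq with
        | zero _j2 he2 hm2 =>
          rw [hpx] at hm2
          exact hmlx hm2
        | succ _j2 _m2 he2 hm2 hne2 hc2 =>
          rw [hpx] at hc2
          have := chainB_det hc2 hc
          omega
      have hMset := MofA_set (v := v) hmrl (pvGet par j) hjr.1 hjr.2
      have ih' := ih fuel' (pvGet ml (pvGet par j)) (pvSet ml (pvGet par j) j)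
        (pvSet mr j (pvGet par j)) hc₂
        (by rw [length_pvSet, hmll]) (by rw [length_pvSet, hmrl])
        (by intro jj l hj
            rw [hMset jj] at hj
            by_cases hjj : jj = j
            · rw [if_pos hjj, if_pos (by obtain ⟨ha, hb⟩ := hxr; omega)] at hj
              cases hj
              exact hjj ▸ he
            · rw [if_neg hjj] at hj
              exact hWf jj l hj)
        (by intro i hi hne
            rw [gml i hi] at hne ⊢
            by_cases hix : i = pvGet par j
            · rw [if_pos hix] at hne ⊢
              refine ⟨hjr, ?_⟩
              rw [gmr j hjr, if_pos rfl, hix]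
            · rw [if_neg hix] at hne ⊢
              obtain ⟨hr1, hr2⟩ := hLR i hi hne
              refine ⟨hr1, ?_⟩
              rw [gmr _ hr1, if_neg (hNoTo i hi)]
              exact hr2)
        (by intro jj hjj hjnxt hne
            rw [gmr jj hjj] at hne ⊢
            by_cases hjeq : jj = j
            · rw [if_pos hjeq] at hne ⊢
              refine ⟨hxr, ?_⟩
              rw [gml _ hxr, if_pos rfl, hjeq]
            · rw [if_neg hjeq] at hne ⊢
              obtain ⟨hr1, hr2⟩ := hRLx jj hjj hjeq hne
              refine ⟨hr1, ?_⟩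
              have hmx : pvGet mr jj ≠ pvGet par j := by
                intro hc'
                rw [hc'] at hr2
                rw [hr2] at hjnxt
                exact hjnxt rfl
              rw [gml _ hr1, if_neg hmx]
              exact hr2)
        (by intro i hi
            rw [gml i hi]
            by_cases hix : i = pvGet par j
            · rw [if_pos hix]
              intro hc'
              exact hnej hc'.symm
            · rw [if_neg hix]
              intro hc'
              obtain ⟨hr1, hr2⟩ := hLR i hi (by rw [hc']; exact fun hcc => hmlx (hcc ▸ rfl))
              rw [hc', hmrnxt] at hr2
              exact hix hr2.symm)
        (by omega)
        ml' mr' heq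
      obtain ⟨c1, c2, c3, c4, c5, c6, c7⟩ := ih'
      refine ⟨c1, c2, c3, c4, c5, ?_, ?_⟩
      · intro jj hjj hjne'
        by_cases hjnxt : jj = pvGet ml (pvGet par j)
        · constructor
          · intro _
            rw [hjnxt, hmrnxt]
            obtain ⟨ha, hb⟩ := hxr
            omega
          · intro _
            rw [hjnxt]
            exact c7
        · rw [c6 jj hjj hjnxt, gmr jj hjj, if_neg hjne']
      · have hjnxt : j ≠ pvGet ml (pvGet par j) := fun hc' => hnej hc'.symm
        rw [c6 j hjr hjnxt, gmr j hjr, if_pos rfl]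
        obtain ⟨ha, hb⟩ := hxr
        omega

theorem length_pvSetB (l : List Bool) (i : Int) (x : Bool) : (pvSetB l i x).length = l.length := by
  simp [pvSetB]

theorem pvGetB_elem (l : List Bool) (i : Int) (h0 : 0 ≤ i) (h : i < (l.length : Int)) :
    pvGetB l i = l[i.toNat]'(by omega) :=
  PySem.List.pyGetD_eq_getElem l false h0 h

theorem pvGetB_set (l : List Bool) (i jj : Int) (x : Bool) (h0 : 0 ≤ i) (h : i < (l.length : Int))
    (h0' : 0 ≤ jj) (h' : jj < (l.length : Int)) :
    pvGetB (pvSetB l i x) jj = if jj = i then x else pvGetB l jj := by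
  rw [pvGetB_elem _ _ h0' (by simpa [length_pvSetB] using h')]
  simp only [pvSetB]
  rw [List.getElem_set]
  rcases eq_or_ne jj i with rfl | hne
  · simp
  · rw [if_neg (by omega), if_neg hne, pvGetB_elem _ _ h0' h']

def parCnt (v par : List Int) : Nat :=
  ((Finset.range v.length).filter (fun j : Nat => pvGet par (j : Int) ≠ -1)).card

theorem parCnt_le (v par : List Int) : parCnt v par ≤ v.length := by
  unfold parCnt
  exact le_trans (Finset.card_filter_le _ _) (by simp)

theorem parCnt_set (v par : List Int) (j x : Int) (hp : par.length = v.length)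
    (hj0 : 0 ≤ j) (hjn : j < (v.length : Int)) (hold : pvGet par j = -1) (hx : x ≠ -1) :
    parCnt v (pvSet par j x) = parCnt v par + 1 := by
  have hset : (Finset.range v.length).filter (fun i : Nat => pvGet (pvSet par j x) (i : Int) ≠ -1) =
      insert j.toNat ((Finset.range v.length).filter (fun i : Nat => pvGet par (i : Int) ≠ -1)) := by
    ext i
    simp only [Finset.mem_filter, Finset.mem_range, Finset.mem_insert]
    constructor
    · rintro ⟨hi1, hi2⟩
      rw [pvGet_pvSet par j (i : Int) x hj0 (by omega) (by omega) (by omega)] at hi2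
      by_cases hc : (i : Int) = j
      · left; omega
      · rw [if_neg hc] at hi2; right; exact ⟨hi1, hi2⟩
    · rintro (hi | ⟨hi1, hi2⟩)
      · subst hi
        refine ⟨by omega, ?_⟩
        rw [pvGet_pvSet par j _ x hj0 (by omega) (by omega) (by omega), if_pos (by omega)]
        exact hx
      · refine ⟨hi1, ?_⟩
        rw [pvGet_pvSet par j _ x hj0 (by omega) (by omega) (by omega)]
        have hc : (i : Int) ≠ j := by
          intro hc
          rw [hc, hold] at hi2
          exact hi2 rfl
        rw [if_neg hc]
        exact hi2
  unfold parCnt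
  rw [hset, Finset.card_insert_of_notMem]
  simp only [Finset.mem_filter, Finset.mem_range, not_and, Decidable.not_not]
  intro _
  have h2 : ((j.toNat : Nat) : Int) = j := by omega
  rw [h2]
  exact hold

def MatchB (k : Int) (v ml mr : List Int) : Prop :=
  ml.length = v.length ∧ mr.length = v.length ∧
  (∀ jj l, MofA v mr jj = some l → EdgeKV k v l jj) ∧
  (∀ i : Int, InRg v i → pvGet ml i ≠ -1 → InRg v (pvGet ml i) ∧ pvGet mr (pvGet ml i) = i) ∧
  (∀ jj : Int, InRg v jj → pvGet mr jj ≠ -1 → InRg v (pvGet mr jj) ∧ pvGet ml (pvGet mr jj) = jj)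

def PhI (k : Int) (v ml mr par : List Int) (seen : List Bool) : Prop :=
  par.length = v.length ∧ seen.length = v.length ∧
  (∀ j : Int, InRg v j → pvGet par j ≠ -1 → ∃ m, ChainB k v ml par j m) ∧
  (∀ j : Int, InRg v j → pvGet par j ≠ -1 → pvGet mr j ≠ -1 → pvGetB seen (pvGet mr j) = true) ∧
  (∀ i : Int, InRg v i → pvGetB seen i = true →
    (pvGet ml i = -1 ∨ ∃ m, ChainB k v ml par (pvGet ml i) m)) ∧
  (∀ i : Int, InRg v i → pvGet ml i = -1 → pvGetB seen i = true)

theorem chainB_root_inr {k : Int} {v ml par : List Int} {r : Int} {m : Nat}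
    (h : ChainB k v ml par r m) : InRg v r := by
  cases h with
  | zero _j he hm => exact edge_rangeR he
  | succ _j _m he hm hne hc => exact edge_rangeR he

theorem scan_main (k : Int) (v ml mr : List Int) (hM : MatchB k v ml mr) (x : Int)
    (hx : InRg v x) :
    ∀ (L : List Int), (∀ j ∈ L, x < j ∧ j < (v.length : Int)) →
    ∀ par seen ch g, PhI k v ml mr par seen → pvGetB seen x = true →
    ∀ par' seen' ch' g',
      (L.foldl (fun st j =>
        match st with
        | (par, seen, ch, g) =>
          if g ≠ -1 then (par, seen, ch, g)
          else if pvGet par j = -1 ∧ j ≠ pvGet ml x ∧ k ≤ |pvGet v j - pvGet v x| then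
            let par' := pvSet par j x
            if pvGet mr j = -1 then (par', seen, true, j)
            else
              let y := pvGet mr j
              let seen' := if ¬ pvGetB seen y = true then pvSetB seen y true else seen
              (par', seen', true, g)
          else (par, seen, ch, g)) (par, seen, ch, g)) = (par', seen', ch', g') →
      (PhI k v ml mr par' seen' ∧
       (∀ jj : Int, InRg v jj → pvGet par jj ≠ -1 → pvGet par' jj = pvGet par jj) ∧
       (∀ i : Int, InRg v i → pvGetB seen i = true → pvGetB seen' i = true) ∧
       parCnt v par ≤ parCnt v par' ∧
       (ch = true → ch' = true) ∧
       ((ch = false ∧ ch' = true) → parCnt v par + 1 ≤ parCnt v par') ∧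
       (ch' = false → (par' = par ∧ seen' = seen ∧ ch = false ∧ g' = g ∧
         (g = -1 → ∀ j ∈ L, pvGet par j = -1 → j ≠ pvGet ml x → ¬ k ≤ |pvGet v j - pvGet v x|))) ∧
       (g ≠ -1 → (par' = par ∧ seen' = seen ∧ ch' = ch ∧ g' = g)) ∧
       ((g = -1 ∧ g' ≠ -1) → (InRg v g' ∧ pvGet par' g' ≠ -1 ∧ pvGet mr g' = -1)) ∧
       ((g = -1 ∧ g' = -1 ∧ (∀ j : Int, InRg v j → pvGet par j ≠ -1 → pvGet mr j ≠ -1)) →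
         (∀ j : Int, InRg v j → pvGet par' j ≠ -1 → pvGet mr j ≠ -1))) := by
  obtain ⟨hmll, hmrl, hWf, hLR, hRL⟩ := hM
  intro L
  induction L with
  | nil =>
    intro _ par seen ch g hPhI hsx par' seen' ch' g' heq
    simp only [List.foldl_nil] at heq
    obtain ⟨h1, h2, h3, h4⟩ : par = par' ∧ seen = seen' ∧ ch = ch' ∧ g = g' := by
      simpa [Prod.ext_iff] using heq
    subst h1; subst h2; subst h3; subst h4
    exact ⟨hPhI, fun jj _ _ => rfl, fun i _ h => h, le_rfl, fun h => h,
      fun h => absurd (h.1.symm.trans h.2) (by simp),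
      fun _ => ⟨rfl, rfl, by assumption, rfl, fun _ j hj => absurd hj (List.not_mem_nil)⟩,
      fun _ => ⟨rfl, rfl, rfl, rfl⟩,
      fun h => absurd h.1 (by rw [h.1] at h; exact fun _ => h.2 rfl),
      fun h j hj => h.2.2 j hj⟩
  | cons j L ihL =>
    intro hLmem par seen ch g hPhI hsx par' seen' ch' g' heq
    obtain ⟨hxj, hjn⟩ := hLmem j List.mem_cons_self
    have hjr : InRg v j := ⟨by obtain ⟨ha, hb⟩ := hx; omega, hjn⟩
    simp only [List.foldl_cons] at heq
    by_cases hg : g ≠ -1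
    · rw [if_pos hg] at heq
      have ihres := ihL (fun j' hj' => hLmem j' (List.mem_cons_of_mem _ hj'))
        par seen ch g hPhI hsx par' seen' ch' g' heq
      obtain ⟨c1, c2, c3, c4, c5, c6, c7, c8, c9, c10⟩ := ihres
      obtain ⟨d1, d2, d3, d4⟩ := c8 hg
      refine ⟨c1, c2, c3, c4, c5, c6, ?_, c8, ?_, ?_⟩
      · intro hch
        exact ⟨d1, d2, by rw [← d3]; exact hch, d4, fun hgc => absurd hgc hg⟩
      · rintro ⟨hgc, -⟩
        exact absurd hgc hg
      · rintro ⟨hgc, -⟩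
        exact absurd hgc hg
    · push_neg at hg
      rw [if_neg (by rw [hg]; simp)] at heq
      by_cases hcond : pvGet par j = -1 ∧ j ≠ pvGet ml x ∧ k ≤ |pvGet v j - pvGet v x|
      · rw [if_pos hcond] at heq
        obtain ⟨hpj, hjml, hkv⟩ := hcond
        obtain ⟨hparl, hseenl, hpa, hpc, hpd, hpe⟩ := hPhI
        have hEdge : EdgeKV k v x j := ⟨hx.1, hxj, hjn, hkv⟩
        have hgrow : ∀ jj : Int, InRg v jj → pvGet par jj ≠ -1 →
            pvGet (pvSet par j x) jj = pvGet par jj := by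
          intro jj hjj hne
          have hjjne : jj ≠ j := fun hc => hne (hc ▸ hpj)
          rw [pvGet_pvSet par j jj x hjr.1 (by rw [hparl]; exact hjr.2) hjj.1
            (by rw [hparl]; exact hjj.2), if_neg hjjne]
        have hparj : pvGet (pvSet par j x) j = x := by
          rw [pvGet_pvSet par j j x hjr.1 (by rw [hparl]; exact hjr.2) hjr.1
            (by rw [hparl]; exact hjr.2), if_pos rfl]
        have hchainj : ∃ m, ChainB k v ml (pvSet par j x) j m := by
          rcases hpd x hx hsx with hml0 | ⟨m, hm⟩
          · exact ⟨0, ChainB.zero j (by rw [hparj]; exact hEdge) (by rw [hparj]; exact hml0)⟩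
          · have hmlrg : InRg v (pvGet ml x) := chainB_root_inr hm
            have hmlne : pvGet ml x ≠ -1 := by obtain ⟨ha, hb⟩ := hmlrg; omega
            have hm₂ := chainB_mono hgrow hm
            exact ⟨m + 1, ChainB.succ j m (by rw [hparj]; exact hEdge)
              (by rw [hparj]; exact hmlne) (by rw [hparj]; exact fun hc => hjml hc.symm)
              (by rw [hparj]; exact hm₂)⟩
        have hmark_grow : ∀ jj : Int, InRg v jj → pvGet par jj ≠ -1 → pvGet (pvSet par j x) jj ≠ -1 := by
          intro jj hjj hne
          rw [hgrow jj hjj hne]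
          exact hne
        have hcnt₂ : parCnt v (pvSet par j x) = parCnt v par + 1 :=
          parCnt_set v par j x hparl hjr.1 hjr.2 hpj (by obtain ⟨ha, hb⟩ := hx; omega)
        by_cases hmrj : pvGet mr j = -1
        · -- goal found at j: break, i.e. all remaining iterations skip
          rw [if_pos hmrj] at heq
          have hPhI₂ : PhI k v ml mr (pvSet par j x) seen := by
            refine ⟨by rw [length_pvSet, hparl], hseenl, ?_, ?_, ?_, hpe⟩
            · intro jj hjj hne
              by_cases hjje : jj = j
              · subst hjje; exact hchainj
              · rw [pvGet_pvSet par j jj x hjr.1 (by rw [hparl]; exact hjr.2) hjj.1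
                  (by rw [hparl]; exact hjj.2), if_neg hjje] at hne
                obtain ⟨m, hm⟩ := hpa jj hjj hne
                exact ⟨m, chainB_mono hgrow hm⟩
            · intro jj hjj hne hmr'
              by_cases hjje : jj = j
              · subst hjje; exact absurd hmrj hmr'
              · rw [pvGet_pvSet par j jj x hjr.1 (by rw [hparl]; exact hjr.2) hjj.1
                  (by rw [hparl]; exact hjj.2), if_neg hjje] at hne
                exact hpc jj hjj hne hmr'
            · intro i hi hsi
              rcases hpd i hi hsi with h0 | ⟨m, hm⟩
              · exact Or.inl h0
              · exact Or.inr ⟨m, chainB_mono hgrow hm⟩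
          have ihres := ihL (fun j' hj' => hLmem j' (List.mem_cons_of_mem _ hj'))
            (pvSet par j x) seen true j hPhI₂ hsx par' seen' ch' g' heq
          obtain ⟨c1, c2, c3, c4, c5, c6, c7, c8, c9, c10⟩ := ihres
          have hjne : j ≠ -1 := by obtain ⟨ha, hb⟩ := hjr; omega
          obtain ⟨d1, d2, d3, d4⟩ := c8 hjne
          subst d1; subst d2
          refine ⟨c1, ?_, fun i _ h => h, by omega, fun _ => by rw [d3], ?_, ?_, ?_, ?_, ?_⟩
          · intro jj hjj hne
            have hjje : jj ≠ j := fun hc => hne (hc ▸ hpj)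
            rw [pvGet_pvSet par j jj x hjr.1 (by rw [hparl]; exact hjr.2) hjj.1
              (by rw [hparl]; exact hjj.2), if_neg hjje]
          · intro _
            omega
          · intro hch
            rw [d3] at hch
            cases hch
          · intro hgc
            exact absurd rfl (hg ▸ hgc)
          · intro _
            rw [d4]
            exact ⟨hjr, by rw [hparj]; obtain ⟨ha, hb⟩ := hx; omega, hmrj⟩
          · rintro ⟨-, hgc, -⟩
            rw [d4] at hgc
            exact absurd hgc hjne
        · rw [if_neg hmrj] at heq
          have hyrg : InRg v (pvGet mr j) := (hRL j hjr hmrj).1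
          have hseeng : ∀ i : Int, InRg v i → pvGetB seen i = true →
              pvGetB (if ¬ pvGetB seen (pvGet mr j) = true
                then pvSetB seen (pvGet mr j) true else seen) i = true := by
            intro i hi hsi
            split_ifs with hy
            · exact hsi
            · rw [pvGetB_set seen _ i true hyrg.1 (by rw [hseenl]; exact hyrg.2) hi.1
                (by rw [hseenl]; exact hi.2)]
              split_ifs with hc
              · rfl
              · exact hsi
          have hseeny : pvGetB (if ¬ pvGetB seen (pvGet mr j) = true
              then pvSetB seen (pvGet mr j) true else seen) (pvGet mr j) = true := by
            split_ifs with hc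
            · exact hc
            · rw [pvGetB_set seen _ _ true hyrg.1 (by rw [hseenl]; exact hyrg.2) hyrg.1
                (by rw [hseenl]; exact hyrg.2), if_pos rfl]
          have hseenl2 : (if ¬ pvGetB seen (pvGet mr j) = true
              then pvSetB seen (pvGet mr j) true else seen).length = v.length := by
            split_ifs
            · exact hseenl
            · rw [length_pvSetB, hseenl]
          have hPhI₂ : PhI k v ml mr (pvSet par j x)
              (if ¬ pvGetB seen (pvGet mr j) = true
                then pvSetB seen (pvGet mr j) true else seen) := by
            refine ⟨by rw [length_pvSet, hparl], hseenl2, ?_, ?_, ?_, ?_⟩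
            · intro jj hjj hne
              by_cases hjje : jj = j
              · subst hjje; exact hchainj
              · rw [pvGet_pvSet par j jj x hjr.1 (by rw [hparl]; exact hjr.2) hjj.1
                  (by rw [hparl]; exact hjj.2), if_neg hjje] at hne
                obtain ⟨m, hm⟩ := hpa jj hjj hne
                exact ⟨m, chainB_mono hgrow hm⟩
            · intro jj hjj hne hmr'
              by_cases hjje : jj = j
              · subst hjje; exact hseeny
              · rw [pvGet_pvSet par j jj x hjr.1 (by rw [hparl]; exact hjr.2) hjj.1
                  (by rw [hparl]; exact hjj.2), if_neg hjje] at hne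
                exact hseeng _ (hRL jj hjj hmr').1 (hpc jj hjj hne hmr')
            · intro i hi hsi
              by_cases hset : ¬ pvGetB seen (pvGet mr j) = true
              · rw [if_pos hset] at hsi
                rw [pvGetB_set seen _ i true hyrg.1 (by rw [hseenl]; exact hyrg.2) hi.1
                  (by rw [hseenl]; exact hi.2)] at hsi
                by_cases hiy : i = pvGet mr j
                · have hmly : pvGet ml (pvGet mr j) = j := (hRL j hjr hmrj).2
                  right
                  rw [hiy, hmly]
                  exact hchainj
                · rw [if_neg hiy] at hsi
                  rcases hpd i hi hsi with h0 | ⟨m, hm⟩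
                  · exact Or.inl h0
                  · exact Or.inr ⟨m, chainB_mono hgrow hm⟩
              · rw [if_neg hset] at hsi
                rcases hpd i hi hsi with h0 | ⟨m, hm⟩
                · exact Or.inl h0
                · exact Or.inr ⟨m, chainB_mono hgrow hm⟩
            · intro i hi hml
              exact hseeng i hi (hpe i hi hml)
          have ihres := ihL (fun j' hj' => hLmem j' (List.mem_cons_of_mem _ hj'))
            (pvSet par j x) _ true g hPhI₂ (hseeng x hx hsx) par' seen' ch' g' heq
          obtain ⟨c1, c2, c3, c4, c5, c6, c7, c8, c9, c10⟩ := ihres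
          refine ⟨c1, ?_, ?_, by omega, fun _ => c5 rfl, fun _ => by omega, ?_, ?_, ?_, ?_⟩
          · intro jj hjj hne
            have hjje : jj ≠ j := fun hc => hne (hc ▸ hpj)
            have hstep : pvGet (pvSet par j x) jj = pvGet par jj := by
              rw [pvGet_pvSet par j jj x hjr.1 (by rw [hparl]; exact hjr.2) hjj.1
                (by rw [hparl]; exact hjj.2), if_neg hjje]
            rw [← hstep]
            exact c2 jj hjj (by rw [hstep]; exact hne)
          · intro i hi hsi
            exact c3 i hi (hseeng i hi hsi)
          · intro hch
            exact absurd (c5 rfl) (by rw [hch]; simp)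
          · intro hgc
            exact absurd rfl (hg ▸ hgc)
          · exact c9
          · rintro ⟨hg1, hg2, hg3⟩
            refine c10 ⟨hg1, hg2, ?_⟩
            intro jj hjj hne
            by_cases hjje : jj = j
            · subst hjje; exact hmrj
            · rw [pvGet_pvSet par j jj x hjr.1 (by rw [hparl]; exact hjr.2) hjj.1
                (by rw [hparl]; exact hjj.2), if_neg hjje] at hne
              exact hg3 jj hjj hne
      · rw [if_neg hcond] at heq
        have ihres := ihL (fun j' hj' => hLmem j' (List.mem_cons_of_mem _ hj'))
          par seen ch g hPhI hsx par' seen' ch' g' heq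
        obtain ⟨c1, c2, c3, c4, c5, c6, c7, c8, c9, c10⟩ := ihres
        refine ⟨c1, c2, c3, c4, c5, c6, ?_, c8, c9, c10⟩
        intro hch
        obtain ⟨d1, d2, d3, d4, d5⟩ := c7 hch
        refine ⟨d1, d2, d3, d4, ?_⟩
        intro hgc j' hj'
        rcases List.mem_cons.mp hj' with rfl | hj''
        · intro h1 h2 h3
          exact hcond ⟨h1, h2, h3⟩
        · exact d5 hgc j' hj''

theorem pass_main (k : Int) (v ml mr : List Int) (hM : MatchB k v ml mr) :
    ∀ (L : List Int), (∀ x ∈ L, InRg v x) →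
    ∀ par seen ch g, PhI k v ml mr par seen →
    ∀ par' seen' ch' g',
      (L.foldl (fun st x =>
        match st with
        | (par, seen, ch, g) =>
          if g ≠ -1 then (par, seen, ch, g)
          else if pvGetB seen x = true then pvScan k v ml mr x (par, seen, ch, g)
          else (par, seen, ch, g)) (par, seen, ch, g)) = (par', seen', ch', g') →
      (PhI k v ml mr par' seen' ∧
       parCnt v par ≤ parCnt v par' ∧
       (ch = true → ch' = true) ∧
       ((ch = false ∧ ch' = true) → parCnt v par + 1 ≤ parCnt v par') ∧
       (ch' = false → (par' = par ∧ seen' = seen ∧ ch = false ∧ g' = g ∧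
         (g = -1 → ∀ x ∈ L, pvGetB seen x = true → ∀ j : Int, x < j → j < (v.length : Int) →
           pvGet par j = -1 → j ≠ pvGet ml x → ¬ k ≤ |pvGet v j - pvGet v x|))) ∧
       (g ≠ -1 → (par' = par ∧ seen' = seen ∧ ch' = ch ∧ g' = g)) ∧
       ((g = -1 ∧ g' ≠ -1) → (InRg v g' ∧ pvGet par' g' ≠ -1 ∧ pvGet mr g' = -1)) ∧
       ((g = -1 ∧ g' = -1 ∧ (∀ j : Int, InRg v j → pvGet par j ≠ -1 → pvGet mr j ≠ -1)) →
         (∀ j : Int, InRg v j → pvGet par' j ≠ -1 → pvGet mr j ≠ -1))) := by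
  intro L
  induction L with
  | nil =>
    intro _ par seen ch g hPhI par' seen' ch' g' heq
    simp only [List.foldl_nil] at heq
    obtain ⟨h1, h2, h3, h4⟩ : par = par' ∧ seen = seen' ∧ ch = ch' ∧ g = g' := by
      simpa [Prod.ext_iff] using heq
    subst h1; subst h2; subst h3; subst h4
    exact ⟨hPhI, le_rfl, fun h => h, fun h => absurd (h.1.symm.trans h.2) (by simp),
      fun _ => ⟨rfl, rfl, by assumption, rfl, fun _ x hx => absurd hx (List.not_mem_nil)⟩,
      fun _ => ⟨rfl, rfl, rfl, rfl⟩,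
      fun h => absurd h.1 (by rw [h.1] at h; exact fun _ => h.2 rfl),
      fun h j hj => h.2.2 j hj⟩
  | cons x L ihL =>
    intro hLmem par seen ch g hPhI par' seen' ch' g' heq
    have hx : InRg v x := hLmem x List.mem_cons_self
    simp only [List.foldl_cons] at heq
    by_cases hg : g ≠ -1
    · rw [if_pos hg] at heq
      have ihres := ihL (fun x' hx' => hLmem x' (List.mem_cons_of_mem _ hx'))
        par seen ch g hPhI par' seen' ch' g' heq
      obtain ⟨c1, c2, c3, c4, c5, c6, c7, c8⟩ := ihres
      obtain ⟨d1, d2, d3, d4⟩ := c6 hg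
      refine ⟨c1, c2, c3, c4, ?_, c6, ?_, ?_⟩
      · intro hch
        exact ⟨d1, d2, by rw [← d3]; exact hch, d4, fun hgc => absurd hgc hg⟩
      · rintro ⟨hgc, -⟩
        exact absurd hgc hg
      · rintro ⟨hgc, -⟩
        exact absurd hgc hg
    · push_neg at hg
      rw [if_neg (by rw [hg]; simp)] at heq
      by_cases hsx : pvGetB seen x = true
      · rw [if_pos hsx] at heq
        rcases hscan : pvScan k v ml mr x (par, seen, ch, g) with ⟨p1, s1, c1, g1⟩
        rw [hscan] at heq
        have hsm := scan_main k v ml mr hM x hx (PySem.List.pyRange (x + 1) (v.length : Int) 1)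
          (fun j hj => by
            rw [PySem.List.mem_pyRange_one] at hj
            exact ⟨by omega, hj.2⟩)
          par seen ch g hPhI hsx p1 s1 c1 g1 (by rw [← hscan]; rfl)
        obtain ⟨s1PhI, s1grow, s1seen, s1cnt, s1mono, s1prog, s1fix, s1skip, s1goal, s1gn⟩ := hsm
        have ihres := ihL (fun x' hx' => hLmem x' (List.mem_cons_of_mem _ hx'))
          p1 s1 c1 g1 s1PhI par' seen' ch' g' heq
        obtain ⟨c1', c2', c3', c4', c5', c6', c7', c8'⟩ := ihres
        refine ⟨c1', by omega, ?_, ?_, ?_, ?_, ?_, ?_⟩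
        · intro hch
          exact c3' (s1mono hch)
        · rintro ⟨hch, hch'⟩
          by_cases hc1 : c1 = true
          · have := s1prog ⟨hch, hc1⟩
            omega
          · have hc1f : c1 = false := by
              cases c1
              · rfl
              · exact absurd rfl hc1
            have := c4' ⟨hc1f, hch'⟩
            omega
        · intro hch
          obtain ⟨d1, d2, d3, d4, d5⟩ := c5' hch
          subst d1; subst d2
          obtain ⟨e1, e2, e3, e4, e5⟩ := s1fix d3
          subst e1; subst e2
          rw [d4, e4]
          refine ⟨rfl, rfl, e3, rfl, ?_⟩
          intro hgc x' hx'
          rcases List.mem_cons.mp hx' with rfl | hx''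
          · intro _ j hj1 hj2 hj3 hj4
            exact e5 hgc j (PySem.List.mem_pyRange_one.mpr ⟨by omega, hj2⟩) hj3 hj4
          · exact d5 (by rw [e4]; exact hgc) x' hx''
        · intro hgc
          exact absurd hgc (by rw [hg]; simp)
        · rintro ⟨-, hgne⟩
          by_cases hg1 : g1 = -1
          · obtain ⟨q1, q2, q3⟩ := c7' ⟨hg1, hgne⟩
            exact ⟨q1, q2, q3⟩
          · obtain ⟨q1, q2, q3⟩ := s1goal ⟨hg, hg1⟩
            obtain ⟨r1, r2, r3, r4⟩ := c6' hg1
            rw [r1, r4]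
            exact ⟨q1, q2, q3⟩
        · rintro ⟨-, hgz, hGN⟩
          by_cases hg1 : g1 = -1
          · exact c8' ⟨hg1, hgz, s1gn ⟨hg, hg1, hGN⟩⟩
          · obtain ⟨r1, r2, r3, r4⟩ := c6' hg1
            rw [r4] at hgz
            exact absurd hgz hg1
      · rw [if_neg hsx] at heq
        have ihres := ihL (fun x' hx' => hLmem x' (List.mem_cons_of_mem _ hx'))
          par seen ch g hPhI par' seen' ch' g' heq
        obtain ⟨c1', c2', c3', c4', c5', c6', c7', c8'⟩ := ihres
        refine ⟨c1', c2', c3', c4', ?_, c6', c7', c8'⟩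
        intro hch
        obtain ⟨d1, d2, d3, d4, d5⟩ := c5' hch
        refine ⟨d1, d2, d3, d4, ?_⟩
        intro hgc x' hx'
        rcases List.mem_cons.mp hx' with rfl | hx''
        · intro hc
          exact absurd hc hsx
        · exact d5 hgc x' hx''

theorem fix_main (k : Int) (v ml mr : List Int) (hM : MatchB k v ml mr) :
    ∀ (fuel : Nat) (par : List Int) (seen : List Bool), PhI k v ml mr par seen →
    (∀ j : Int, InRg v j → pvGet par j ≠ -1 → pvGet mr j ≠ -1) →
    v.length + 1 ≤ fuel + parCnt v par →
    ∀ par' seen' g', pvFix k v ml mr fuel par seen = (par', seen', g') →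
      (PhI k v ml mr par' seen' ∧
       (g' = -1 → ((∀ j : Int, InRg v j → pvGet par' j ≠ -1 → pvGet mr j ≠ -1) ∧
         pvPass k v ml mr par' seen' = (par', seen', false, -1))) ∧
       (g' ≠ -1 → (InRg v g' ∧ pvGet par' g' ≠ -1 ∧ pvGet mr g' = -1))) := by
  intro fuel
  induction fuel with
  | zero =>
    intro par seen hPhI hGN hfuel par' seen' g' heq
    have := parCnt_le v par
    omega
  | succ fuel ih =>
    intro par seen hPhI hGN hfuel par' seen' g' heq
    rw [pvFix] at heq
    rcases hp : pvPass k v ml mr par seen with ⟨p1, s1, ch, g1⟩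
    rw [hp] at heq
    simp only [] at heq
    have hpm := pass_main k v ml mr hM (PySem.List.pyRange 0 (v.length : Int) 1)
      (fun x hx => by
        rw [PySem.List.mem_pyRange_one] at hx
        exact ⟨hx.1, hx.2⟩)
      par seen false (-1) hPhI p1 s1 ch g1 (by rw [← hp]; rfl)
    obtain ⟨c1, c2, c3, c4, c5, c6, c7, c8⟩ := hpm
    by_cases hcont : ch = true ∧ g1 = -1
    · rw [if_pos hcont] at heq
      have hprog := c4 ⟨rfl, hcont.1⟩
      exact ih p1 s1 c1 (c8 ⟨rfl, hcont.2, hGN⟩) (by omega) par' seen' g' heq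
    · rw [if_neg hcont] at heq
      obtain ⟨h1, h2, h3⟩ : p1 = par' ∧ s1 = seen' ∧ g1 = g' := by
        simpa [Prod.ext_iff] using heq
      subst h1; subst h2; subst h3
      refine ⟨c1, ?_, ?_⟩
      · intro hgz
        have hchf : ch = false := by
          cases ch
          · rfl
          · exact absurd ⟨rfl, hgz⟩ hcont
        obtain ⟨d1, d2, -, -, -⟩ := c5 hchf
        subst d1; subst d2
        exact ⟨c8 ⟨rfl, hgz, hGN⟩, by rw [hp, hchf, hgz]⟩
      · intro hgne
        exact c7 ⟨rfl, hgne⟩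

theorem msize_le (v : List Int) (M : Int → Option Int) : msize v M ≤ v.length := by
  unfold msize
  exact le_trans (Finset.card_filter_le _ _) (by simp)

theorem matchB_inj {k : Int} {v ml mr : List Int} (hM : MatchB k v ml mr) :
    IsM k v (MofA v mr) := by
  obtain ⟨hmll, hmrl, hWf, hLR, hRL⟩ := hM
  refine ⟨hWf, ?_⟩
  intro j j' l hj hj'
  obtain ⟨hj0, hjn, hjne, hjval⟩ := MofA_eq_some.mp hj
  obtain ⟨hj0', hjn', hjne', hjval'⟩ := MofA_eq_some.mp hj'
  have h1 := (hRL j ⟨hj0, hjn⟩ hjne).2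
  have h2 := (hRL j' ⟨hj0', hjn'⟩ hjne').2
  rw [hjval] at h1
  rw [hjval'] at h2
  rw [← h1, ← h2]

theorem seen0_get (v ml : List Int) (i : Int) (hi : InRg v i) :
    pvGetB ((PySem.List.pyRange 0 (v.length : Int) 1).map (fun i => decide (pvGet ml i = -1))) i
      = decide (pvGet ml i = -1) := by
  obtain ⟨h0, hn⟩ := hi
  have hit : ((i.toNat : Nat) : Int) = i := by omega
  rw [← hit]
  unfold pvGetB
  rw [PySem.List.pyGetD_map_pyRange _ v.length i.toNat false (by omega)]

theorem seen0_len (v ml : List Int) :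
    ((PySem.List.pyRange 0 (v.length : Int) 1).map (fun i => decide (pvGet ml i = -1))).length
      = v.length := by
  rw [List.length_map, PySem.List.pyRange_zero_natCast, List.length_map, List.length_range]

theorem phasesB (k : Int) (v : List Int) :
    ∀ (fuel : Nat) (ml mr : List Int) (matched : Int),
    MatchB k v ml mr →
    matched = (msize v (MofA v mr) : Int) →
    v.length + 1 ≤ fuel + msize v (MofA v mr) →
    ∃ M, IsM k v M ∧ (∀ u, InRg v u → ¬ lMt M u → NoAugFrom k v M u) ∧
      pvPhases k v fuel ml mr matched = (v.length : Int) - (msize v M : Int) := by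
  intro fuel
  induction fuel with
  | zero =>
    intro ml mr matched hM hc hfuel
    have := msize_le v (MofA v mr)
    omega
  | succ fuel ih =>
    intro ml mr matched hM hc hfuel
    obtain ⟨hmll, hmrl, hWf, hLR, hRL⟩ := hM
    have hPhI0 : PhI k v ml mr (List.replicate v.length (-1 : Int))
        ((PySem.List.pyRange 0 (v.length : Int) 1).map (fun i => decide (pvGet ml i = -1))) := by
      refine ⟨by simp, seen0_len v ml, ?_, ?_, ?_, ?_⟩
      · intro j hj hne
        exact absurd (pvGet_replicate v.length (-1) j hj.1 hj.2) hne
      · intro j hj hne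
        exact absurd (pvGet_replicate v.length (-1) j hj.1 hj.2) hne
      · intro i hi hs
        rw [seen0_get v ml i hi] at hs
        exact Or.inl (by simpa using hs)
      · intro i hi hml
        rw [seen0_get v ml i hi]
        simpa using hml
    rcases hfix : pvFix k v ml mr (v.length + 2) (List.replicate v.length (-1 : Int))
        ((PySem.List.pyRange 0 (v.length : Int) 1).map (fun i => decide (pvGet ml i = -1)))
      with ⟨par, seen, g⟩
    have hfm := fix_main k v ml mr ⟨hmll, hmrl, hWf, hLR, hRL⟩ (v.length + 2) _ _
      hPhI0
      (by intro j hj hne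
          exact absurd (pvGet_replicate v.length (-1) j hj.1 hj.2) hne)
      (by omega) par seen g hfix
    obtain ⟨hPhI, hgz, hgne⟩ := hfm
    obtain ⟨hparl, hseenl, hpa, hpc, hpd, hpe⟩ := hPhI
    have hstep : pvPhases k v (fuel + 1) ml mr matched =
        (if g = -1 then (v.length : Int) - matched
         else
           match pvFlip par (v.length + 1) ml mr g with
           | (ml', mr') => pvPhases k v fuel ml' mr' (matched + 1)) := by
      rw [pvPhases]
      rw [hfix]
    by_cases hg : g = -1
    · -- no reachable free right: the matching has no augmenting path
      obtain ⟨hnomark, hfixpt⟩ := hgz hg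
      have hCL := pass_main k v ml mr ⟨hmll, hmrl, hWf, hLR, hRL⟩
        (PySem.List.pyRange 0 (v.length : Int) 1)
        (fun x hx => by rw [PySem.List.mem_pyRange_one] at hx; exact ⟨hx.1, hx.2⟩)
        par seen false (-1) ⟨hparl, hseenl, hpa, hpc, hpd, hpe⟩ par seen false (-1)
        (by exact hfixpt)
      obtain ⟨-, -, -, -, hCL', -, -, -⟩ := hCL
      obtain ⟨-, -, -, -, hclosure'⟩ := hCL' rfl
      have hclosure := hclosure' rfl
      refine ⟨MofA v mr, matchB_inj ⟨hmll, hmrl, hWf, hLR, hRL⟩, ?_, ?_⟩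
      · intro u hu hfree
        have hmlu : pvGet ml u = -1 := by
          by_contra hne
          obtain ⟨hr1, hr2⟩ := hLR u hu hne
          refine hfree ⟨pvGet ml u, ?_⟩
          rw [MofA_eq_some]
          refine ⟨hr1.1, hr1.2, ?_, hr2⟩
          rw [hr2]
          obtain ⟨ha, hb⟩ := hu
          omega
        have hseenu : pvGetB seen u = true := hpe u hu hmlu
        have hkey : ∀ r, ReachKV k v (MofA v mr) u r →
            (pvGet mr r ≠ -1 ∧ pvGetB seen (pvGet mr r) = true) := by
          intro r hr
          induction hr with
          | base r hre =>
            have hrg : InRg v r := edge_rangeR hre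
            have hmarked : pvGet par r ≠ -1 := by
              intro hpr
              have hrne : r ≠ pvGet ml u := by
                rw [hmlu]
                obtain ⟨ha, hb⟩ := hrg
                omega
              exact hclosure u (PySem.List.mem_pyRange_one.mpr ⟨hu.1, hu.2⟩) hseenu r
                hre.2.1 hre.2.2.1 hpr hrne hre.2.2.2
            have hmr : pvGet mr r ≠ -1 := hnomark r hrg hmarked
            exact ⟨hmr, hpc r hrg hmarked hmr⟩
          | step r xm r' hrch hmr hre ihk =>
            obtain ⟨hr0, hrn, hrne, hrval⟩ := MofA_eq_some.mp hmr
            obtain ⟨ihk1, ihk2⟩ := ihk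
            have hxmrg : InRg v xm := edge_rangeL hre
            have hr'rg : InRg v r' := edge_rangeR hre
            have hseenxm : pvGetB seen xm = true := by rw [← hrval]; exact ihk2
            by_cases hr'ml : r' = pvGet ml xm
            · have hmlne : pvGet ml xm ≠ -1 := by
                rw [← hr'ml]
                obtain ⟨ha, hb⟩ := hr'rg
                omega
              obtain ⟨hq1, hq2⟩ := hLR xm hxmrg hmlne
              have hmrr' : pvGet mr r' = xm := by rw [hr'ml]; exact hq2
              refine ⟨?_, ?_⟩
              · rw [hmrr']
                obtain ⟨ha, hb⟩ := hxmrg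
                omega
              · rw [hmrr']
                exact hseenxm
            · have hmarked : pvGet par r' ≠ -1 := by
                intro hpr
                exact hclosure xm (PySem.List.mem_pyRange_one.mpr ⟨hxmrg.1, hxmrg.2⟩) hseenxm
                  r' hre.2.1 hre.2.2.1 hpr hr'ml hre.2.2.2
              have hmrne : pvGet mr r' ≠ -1 := hnomark r' hr'rg hmarked
              exact ⟨hmrne, hpc r' hr'rg hmarked hmrne⟩
        intro r hr hnone
        have hrg : InRg v r := by
          cases hr with
          | base _ hre => exact edge_rangeR hre
          | step _ xm _ hrch hmr hre => exact edge_rangeR hre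
        obtain ⟨h1, -⟩ := hkey r hr
        rw [MofA_eq_none] at hnone
        exact hnone ⟨hrg.1, hrg.2, h1⟩
      · rw [hstep, if_pos hg, hc]
    · -- a free right vertex g was reached: flip its chain
      obtain ⟨hgrg, hgpar, hgmr⟩ := hgne hg
      obtain ⟨m, hchain⟩ := hpa g hgrg hgpar
      have hmb := chainB_bound hchain
      rcases hflip : pvFlip par (v.length + 1) ml mr g with ⟨ml', mr'⟩
      have hfb := flipB k v par m (v.length + 1) g ml mr hchain hmll hmrl hWf hLR
        (fun jj hjj _ hne => hRL jj hjj hne)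
        (by intro i hi
            intro hcon
            obtain ⟨hq1, hq2⟩ := hLR i hi (by rw [hcon]; exact hg)
            rw [hcon, hgmr] at hq2
            obtain ⟨ha, hb⟩ := hi
            omega)
        (by omega) ml' mr' hflip
      obtain ⟨f1, f2, f3, f4, f5, f6, f7⟩ := hfb
      have hM' : MatchB k v ml' mr' := ⟨f1, f2, f3, f4, f5⟩
      have hmsz : msize v (MofA v mr') = msize v (MofA v mr) + 1 := by
        refine msize_succ v _ _ ⟨g, hgrg, ?_, ?_, ?_⟩
        · rw [MofA_eq_none]
          rintro ⟨-, -, hcc⟩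
          exact hcc hgmr
        · rw [Option.isSome_iff_exists]
          refine ⟨pvGet mr' g, ?_⟩
          rw [MofA_eq_some]
          exact ⟨hgrg.1, hgrg.2, f7, rfl⟩
        · intro j hjg
          by_cases hjr : InRg v j
          · have hiff := f6 j hjr hjg
            by_cases hj1 : pvGet mr' j ≠ -1
            · have hj2 := hiff.mp hj1
              rw [Option.isSome_iff_exists.mpr ⟨pvGet mr' j, MofA_eq_some.mpr ⟨hjr.1, hjr.2, hj1, rfl⟩⟩,
                 Option.isSome_iff_exists.mpr ⟨pvGet mr j, MofA_eq_some.mpr ⟨hjr.1, hjr.2, hj2, rfl⟩⟩]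
            · push_neg at hj1
              have hj2 : pvGet mr j = -1 := by
                by_contra hcc
                exact (hiff.mpr hcc) hj1
              have e1 : MofA v mr' j = none := by
                rw [MofA_eq_none]; rintro ⟨-, -, hcc⟩; exact hcc hj1
              have e2 : MofA v mr j = none := by
                rw [MofA_eq_none]; rintro ⟨-, -, hcc⟩; exact hcc hj2
              rw [e1, e2]
          · have e1 : MofA v mr' j = none := by
              rw [MofA_eq_none]; rintro ⟨hc1, hc2, -⟩; exact hjr ⟨hc1, hc2⟩
            have e2 : MofA v mr j = none := by
              rw [MofA_eq_none]; rintro ⟨hc1, hc2, -⟩; exact hjr ⟨hc1, hc2⟩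
            rw [e1, e2]
      obtain ⟨M, hMi, hMno, hMres⟩ := ih ml' mr' (matched + 1) hM'
        (by rw [hmsz, hc]; push_cast; ring) (by omega)
      refine ⟨M, hMi, hMno, ?_⟩
      rw [hstep, if_neg hg, hflip]
      exact hMres

theorem B_char (k : Int) (v : List Int) :
    ∃ M, IsM k v M ∧ (∀ u, InRg v u → ¬ lMt M u → NoAugFrom k v M u) ∧
      problemSolving_alt k v = (v.length : Int) - (msize v M : Int) := by
  have hnone := msize_zero_init k v
  have hmsz0 : msize v (MofA v (List.replicate v.length (-1 : Int))) = 0 := by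
    unfold msize
    rw [Finset.card_eq_zero]
    ext j
    simp only [Finset.mem_filter, Finset.notMem_empty, iff_false, not_and]
    intro _
    rw [hnone]
    simp
  have hM0 : MatchB k v (List.replicate v.length (-1 : Int))
      (List.replicate v.length (-1 : Int)) := by
    refine ⟨by simp, by simp, ?_, ?_, ?_⟩
    · intro j l hj
      rw [hnone j] at hj
      cases hj
    · intro i hi hne
      exact absurd (pvGet_replicate v.length (-1) i hi.1 hi.2) hne
    · intro j hj hne
      exact absurd (pvGet_replicate v.length (-1) j hj.1 hj.2) hne
  obtain ⟨M, h1, h2, h3⟩ := phasesB k v (v.length + 1)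
    (List.replicate v.length (-1 : Int)) (List.replicate v.length (-1 : Int)) 0
    hM0 (by rw [hmsz0]; rfl) (by rw [hmsz0])
  exact ⟨M, h1, h2, by unfold problemSolving_alt; rw [h3]⟩

theorem bdd_of_isM {k : Int} {v : List Int} {M : Int → Option Int} (hM : IsM k v M) :
    BddM M ((v.length : Int)) := by
  intro j l hj
  have := hM.1 j l hj
  obtain ⟨h1, h2, h3, -⟩ := this
  omega

theorem AB_equal (k : Int) (v : List Int) : problemSolving k v = problemSolving_alt k v := by
  obtain ⟨MA, hMA, hmaxA, hresA⟩ := A_char k v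
  obtain ⟨MB, hMB, hnoB, hresB⟩ := B_char k v
  have h1 : msize v MB ≤ msize v MA := hmaxA MB hMB (bdd_of_isM hMB)
  have h2 : msize v MA ≤ msize v MB := by
    refine koenig k v MB MA ((v.length : Int)) hMB hMA (bdd_of_isM hMA) ?_
    intro u hu0 hun huf
    exact hnoB u ⟨hu0, hun⟩ huf
  have : msize v MA = msize v MB := le_antisymm h2 h1
  rw [hresA, hresB, this]

-- ===== VERDICT (by name: the statement is the Claim_ definition above) =====
theorem problemSolving_spec : Claim_equal_problemSolving := by
  intro k v _
  unfold Spec_problemSolving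
  exact AB_equal k v
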